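/- GENERATED by mk_final_copies.py from the proof of the farm's unit `start_decoder.C2a` (farm:start_decoder.C2a.1: Lemmas.lean) as the
   re-elaboration sweep compiled it — do not edit. -/
import Asan.CheckWalk
import Vorbis.Spec.StartDecoderATest
import Vorbis.Spec.StartDecoderBTest
import Vorbis.Spec.Units.start_decoder_C2a
open X86 X86.User Asan Vorbis Vorbis.Spec Vorbis.Spec.StartDecoder

set_option maxRecDepth 4000
set_option maxHeartbeats 4000000

namespace Vorbis.Spec.start_decoder_C2a

/-- A stack slot of the steady frame, as the word the walker computes: `R + j = RA - (1480 - j)`. -/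
theorem slot_word (x : Word) (j : Nat) (hj : j ≤ 1480) (hx : 1480 ≤ x.toNat) :
    addr (x.toNat - 1480 + j) = x - UInt64.ofNat (1480 - j) := by
  symm
  apply eq_addr
  u_omega

/-- The return-address slot of a call from the steady frame: `R - 8 = RA - 1488`. -/
theorem sub_1488 (x : Word) : x - 1480 - 8 = x - 1488 := by
  apply UInt64.eq_of_toBitVec_eq
  simp only [UInt64.toBitVec_sub]
  generalize x.toBitVec = b
  bv_decide

/-- **Where `*f` is, relative to start_decoder's own stack** (one arithmetic fact for `u_omega`): `*f` lies inside ONE live object of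
the callers' frames (`Hand.obj`) — above the return-address slot (`Frame.callers`) — or of `A.2` — off the stack region
(`ShadowInv.off`). So no push, spill or callee frame of start_decoder meets it. -/
theorem f_where {u₀ : State} {g : Ghost} {pc : Word} {A : Arena × List Obj} {v : State}
    (hfr : Frame u₀ g pc A v) (hh : g.Hand A) :
    0x119d40 ≤ g.f ∧ g.f + 1808 ≤ 0xC00000 ∧ (g.RA + 8 ≤ g.f ∨ g.f + 1808 ≤ 0x700000 ∨ 0x800000 ≤ g.f) := by
  have hl : LiveIn A.2 g.frames' g.f Off.sizeof.stb_vorbis := hh.obj.mono (sub_frames' g A)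
  have hw := hl.where_ hfr.shadow hfr.offText (by decide)
  simp only [Off.sizeof.stb_vorbis] at hw
  refine ⟨hw.1, hw.2.1, ?_⟩
  obtain ⟨o, ho, h1, h2⟩ := hh.obj
  simp only [Off.sizeof.stb_vorbis] at h2
  rcases List.mem_append.mp ho with hs | hoth
  · -- an object of a caller's protected frame
    unfold stackObjs at hs
    obtain ⟨bF, hbF, hin⟩ := List.mem_flatMap.mp hs
    have hmem : bF ∈ g.frames' := List.mem_cons_of_mem _ hbF
    obtain ⟨k1, k2, _, _, _⟩ := hfr.shadow.stack.active bF hmem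
    have hg := FrameLayout.objsAt_gran k1 k2 hin
    have hc := hfr.callers bF hbF
    have hra := hfr.ra.1
    have e : o.gLo = o.base / 8 := rfl
    left
    omega
  · have := hfr.shadow.off o hoth
    unfold OffStack at this
    omega

/-- **The windows of `*f` that `SDw len 3` reads BESIDES the arena's four fields and the bit reader's** (S5's `Mid.winsAt` for the
first half): `sample_rate`, `channels`; `blocksize_0` … `codebooks` and the zero rest up to the paging fields; `first_decode`;
`discard_samples_deferred`. A reader call, `error` (`[140, 144)`), an allocator call (`[8, 12)`, `[128, 136)`) write none of them. -/
def sdwWins : Wins := [(0, 8), (152, 1480), (1749, 1750), (1784, 1788)]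

/-- **FRAME OF `SDw len 3`** (the missing analogue of S5's `Mid.frame`): over a callee or a batch of stores that leaves the windows
`sdwWins` of `*f`, the frame constants `[R + 8, R + 28H)` and the shadow alone; the arena layer and `Bits` are given for the new
memory (`ArenaOK.frame`; the reader's post / `Bits.frame_fields`). No block content is read by `SDw 3`. -/
theorem sdw_frame {len : Nat} {A : Arena × List Obj} {Blk : Block → Prop} {Live : Nat → Prop} {mem mem' : Mem} {f R : Nat}
    (h : SDw len 3 A Blk Live mem f R) (he : ObjEq sdwWins mem f mem' f)
    (hconsts : Mem.EqOn (R + 8) (R + 0x28) mem mem') (hR : R + 0x28 ≤ 2 ^ 64)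
    (hsh : Mem.EqOn 0xC00000 0xE00000 mem mem') (harena : ArenaOK A.1 A.2 mem' f) (hbits : Bits Blk len mem' f) :
    SDw len 3 A Blk Live mem' f R := by
  have m0 : ((0, 8) : Nat × Nat) ∈ sdwWins := List.mem_cons_self
  have m1 : ((152, 1480) : Nat × Nat) ∈ sdwWins := List.mem_cons_of_mem _ List.mem_cons_self
  refine ⟨h.env.eqOn hsh, h.frame.frame hconsts hR, harena, h.setups, hbits, ?_, ?_, ?_, ?_, ?_⟩
  · have e : stb_vorbis.first_decode mem' f = stb_vorbis.first_decode mem f := by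
      simp only [vacc, voff]
      exact he.u8 1749 (by decide)
    rw [e]
    exact h.first
  · have e : stb_vorbis.discard_samples_deferred mem' f = stb_vorbis.discard_samples_deferred mem f := by
      simp only [vacc, voff]
      exact he.i32 1784 (by decide)
    rw [e]
    exact h.discard0
  · intro h1
    apply (h.header h1).transfer
    exact he.sub (by decide)
  · intro h3
    obtain ⟨hc, hne⟩ := h.cb0 h3
    refine ⟨hc.transfer (he.sub (by decide)) (fun _ _ hb => hb), ?_⟩
    have e : stb_vorbis.codebooks mem' f = stb_vorbis.codebooks mem f := by
      simp only [vacc, voff]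
      exact he.u64 168 (by decide)
    rw [e]
    exact hne
  · intro o ho1 ho2
    have hz := h.rest o ho1 ho2
    have hlo : 176 ≤ o := by
      have : restFrom 3 = 176 := by decide
      omega
    simp only [voff] at ho2
    rw [he (152, 1480) m1 o (by omega) ho2]
    exact hz

/-- **What segment C2 carries from its entry to every exit** (the memory-dependent clauses of `BodyC2` / `Cur` that the code in
between does not establish itself): SD.3 in its weak form, the record with the ages, ZF(i), the two spill slots. `A2 A3` are the
ghost snapshots of `BodyC2.ages`; the head-of-iteration snapshot is the arena `A.1` of the entry. -/
structure Carry (g : Ghost) (i : Nat) (A2 A3 : Arena) (A : Arena × List Obj) (mem : Mem) : Prop where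
  sdw : SDw g.len 3 A (g.Blk A) (g.Live A) mem g.f g.R
  ages : BookTrans A2 A3 A.1 A.1 mem g.f i
  zf : ZF mem (stb_vorbis.codebooks mem g.f) (stb_vorbis.codebook_count mem g.f).toNat i
  slot_f : mem.u64 (g.R + 0x18) = g.f
  slot_i : mem.u32 (g.R + 0x30) = i

/-- The entry assertion of C2 gives the carried clauses. -/
theorem Carry.of_body {u₀ : State} {g : Ghost} {i : Nat} {A : Arena × List Obj} {v : State} (hb : BodyC2 u₀ g i A v) :
    ∃ A2 A3, Carry g i A2 A3 A v.mem := by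
  obtain ⟨A2, A3, ha⟩ := hb.ages
  exact ⟨A2, A3, Cur.sd_of_sd4 hb.sd, ha, hb.sd.zf, hb.slot_f, hb.slot_i⟩

/-- The windows of `*f` the carried clauses read besides the arena's and the reader's fields: `sdwWins` + `BookTrans.wins`. -/
def carryWins : Wins := [(0, 8), (24, 48), (152, 1480), (1749, 1750), (1784, 1788)]

/-- **FRAME of the carried clauses** over a callee / a batch of stores that keeps every setup block of the arena (a reader, `error`, an
allocator, a push: they write `*f`, the stack and shadow bytes only), leaves the windows `carryWins` of `*f`, the frame slots
`[R + 8, R + 38H)` and the shadow alone. -/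
theorem Carry.frame {g : Ghost} {i : Nat} {A2 A3 : Arena} {A : Arena × List Obj} {mem mem' : Mem}
    (h : Carry g i A2 A3 A mem) (he : ObjEq carryWins mem g.f mem' g.f) (hk : AllKept A.1.Blk mem mem')
    (hslots : Mem.EqOn (g.R + 8) (g.R + 0x38) mem mem') (hR : g.R + 0x38 ≤ 2 ^ 64)
    (hsh : Mem.EqOn 0xC00000 0xE00000 mem mem') (harena : ArenaOK A.1 A.2 mem' g.f)
    (hbits : Bits (g.Blk A) g.len mem' g.f) : Carry g i A2 A3 A mem' := by
  have ecnt : stb_vorbis.codebook_count mem' g.f = stb_vorbis.codebook_count mem g.f := by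
    simp only [vacc, voff]
    exact he.i32 160 (by decide)
  have ecbs : stb_vorbis.codebooks mem' g.f = stb_vorbis.codebooks mem g.f := by
    simp only [vacc, voff]
    exact he.u64 168 (by decide)
  have hages := h.ages.frame_old (he.sub (by decide)) hk
  refine ⟨sdw_frame h.sdw (he.sub (by decide)) (hslots.mono (Nat.le_refl _) (by omega)) (by omega) hsh harena hbits,
    hages, ?_, ?_, ?_⟩
  · -- ZF(i): the codebooks block is kept
    rw [ecnt, ecbs]
    have hF1 := h.ages.F1
    have hle := h.ages.n_le
    have hkept := hk _ h.ages.cbOK.F2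
    apply h.zf.same
    · apply Mem.EqOn.mono hkept.same
      · simp only []
        exact Nat.le_add_right _ _
      · exact Nat.le_refl _
    · omega
    · exact hkept.inside
  · rw [hslots.u64 (g.R + 0x18) (by omega) (by omega) hR]
    exact h.slot_f
  · rw [hslots.u32 (g.R + 0x30) (by omega) (by omega) hR]
    exact h.slot_i

/-- FRAME of SH7 for `log2_4`: the sixteen bytes of the table read the same. -/
theorem log2_frame {mem mem' : Mem} (h : Log2_4In mem) (he : Mem.EqOn 0x120640 0x120650 mem mem') : Log2_4In mem' := by
  intro j hj
  rw [← h j hj]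
  have e : (UInt64.ofNat (Vorbis.Globals.log2_4.beg + j)).toNat = 0x120640 + j := by
    have : Vorbis.Globals.log2_4.beg = 0x120640 := rfl
    rw [this, UInt64.toNat_ofNat']
    omega
  exact he.readLE _ 1 (by omega) (by omega) (by omega)

/-- **A window of a footprint that the carried clauses tolerate without further ado**: inside start_decoder's stack below the steady
stack pointer (a pushed return address, a callee's frame), or inside one of the fields of `*f` that the readers and `error`
write (`stream`, the page fields, `eof`, `error`, the segment table … `valid_bits`). -/
def OKSpan (g : Ghost) (s : Span) : Prop :=
  (g.RA - depth ≤ s.lo ∧ s.hi ≤ g.R) ∨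
    (g.f + 48 ≤ s.lo ∧ s.hi ≤ g.f + 56) ∨ (g.f + 84 ≤ s.lo ∧ s.hi ≤ g.f + 96) ∨ (g.f + 136 ≤ s.lo ∧ s.hi ≤ g.f + 144) ∨
    (g.f + 1484 ≤ s.lo ∧ s.hi ≤ g.f + 1749) ∨ (g.f + 1752 ≤ s.lo ∧ s.hi ≤ g.f + 1784)

/-- **ONE STEP OF SEGMENT C2 THAT ALLOCATES NOTHING AND STORES INTO NO ARENA BLOCK** (a check call, a `get_bits`, an `error`): the
common part `Frame` at the new program counter and the carried clauses, from the machine-level facts of the new state `w` — its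
footprint `hs` relative to the cut-point state `v`, every window an `OKSpan` — and `Bits` of the new memory (the reader's post,
or `store_off_obj`). -/
theorem stepC {u₀ : State} {g : Ghost} {pc pc' : Word} {i : Nat} {A2 A3 : Arena} {A : Arena × List Obj} {v w : State}
    (hfr : Frame u₀ g pc A v) (hh : g.Hand A) (hc : Carry g i A2 A3 A v.mem) {ws : List Span}
    (hs : Mem.SameExcept ws v.mem w.mem) (hws : ∀ s, s ∈ ws → OKSpan g s)
    (hrip : w.rip = pc') (hrsp : w.reg .rsp = addr g.R) (hcode : CodeOK u₀ w.mem) (hinv : abiInv w)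
    (hbits : Bits (g.Blk A) g.len w.mem g.f) :
    Frame u₀ g pc' A w ∧ Carry g i A2 A3 A w.mem ∧ ObjEq carryWins v.mem g.f w.mem g.f ∧ AllKept A.1.Blk v.mem w.mem := by
  obtain ⟨hw1, hw2, hw3⟩ := f_where hfr hh
  obtain ⟨hr1, hr2⟩ := hfr.r_eq
  obtain ⟨ha1, ha2, ha3⟩ := hfr.ra
  simp only [depth, steady] at hr1 ha2
  have harena := hc.sdw.arena
  have hAR1 := harena.AR1
  have hout := hh.objOut
  simp only [voff] at hout
  -- every window, as arithmetic: off the shadow, off the frame slots, off the arena, off the windows of `*f` that are read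
  have hspan : ∀ s, s ∈ ws → s.hi ≤ 0xC00000 ∧
      ((g.RA - 1888 ≤ s.lo ∧ s.hi ≤ g.R) ∨
        (g.f + 48 ≤ s.lo ∧ s.hi ≤ g.f + 56) ∨ (g.f + 84 ≤ s.lo ∧ s.hi ≤ g.f + 96) ∨ (g.f + 136 ≤ s.lo ∧ s.hi ≤ g.f + 144) ∨
        (g.f + 1484 ≤ s.lo ∧ s.hi ≤ g.f + 1749) ∨ (g.f + 1752 ≤ s.lo ∧ s.hi ≤ g.f + 1784)) := by
    intro s hsm
    have := hws s hsm
    unfold OKSpan at this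
    simp only [depth] at this
    refine ⟨?_, this⟩
    omega
  have hun : Mem.EqOn 0xC00000 0xE00000 v.mem w.mem := by
    apply hs.eqOn
    intro s hsm
    have := (hspan s hsm).1
    omega
  have hslots : Mem.EqOn (g.R + 8) (g.R + 0x38) v.mem w.mem := by
    apply hs.eqOn
    intro s hsm
    have := (hspan s hsm).2
    omega
  have hsaved : Mem.EqOn (g.R + 0x598) (g.R + 0x5d0) v.mem w.mem := by
    apply hs.eqOn
    intro s hsm
    have := (hspan s hsm).2
    omega
  have hflds : Mem.EqOn (g.f + 112) (g.f + 136) v.mem w.mem := by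
    apply hs.eqOn
    intro s hsm
    have := (hspan s hsm).2
    omega
  have hlog : Mem.EqOn 0x120640 0x120650 v.mem w.mem := by
    have hblk : g.Blk A (objBlock g.f) := runBlk_extra List.mem_cons_self
    have hblk2 : g.Blk A ⟨0x120640, 16⟩ := by
      apply runBlk_extra
      simp only [fixedBlocks, globalBlocks, List.mem_cons, true_or, or_true]
    have hd := hc.sdw.env.ok.disjoint hblk hblk2 (by
      intro e
      have := congrArg Block.size e
      simp only [vblock, voff] at this
      omega)
    simp only [vblock, voff] at hd
    apply hs.eqOn
    intro s hsm
    have := (hspan s hsm).2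
    omega
  have hobj : ObjEq carryWins v.mem g.f w.mem g.f := by
    apply ObjEq.of_sameExcept hs
    · intro win hwin
      simp only [carryWins, List.mem_cons, List.mem_nil_iff, or_false] at hwin
      rcases hwin with rfl | rfl | rfl | rfl | rfl <;> simp only [] <;> omega
    · intro win hwin s hsm
      have := (hspan s hsm).2
      simp only [carryWins, List.mem_cons, List.mem_nil_iff, or_false] at hwin
      rcases hwin with rfl | rfl | rfl | rfl | rfl <;> simp only [] <;> omega
  have hkept : AllKept A.1.Blk v.mem w.mem := by
    apply AllKept.of_sameExcept harena.blkOK hs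
    intro B hB s hsm
    have := (hspan s hsm).2
    have hin := arena_inside harena hB
    have hoff := harena.blk_off_stack hB
    omega
  have harena' : ArenaOK A.1 A.2 w.mem g.f := by
    apply harena.frame (by simp only [voff]; omega)
    simp only [voff]
    exact hflds
  have hR64 : g.R + 0x5d0 ≤ 2 ^ 64 := by omega
  refine ⟨?_, hc.frame hobj hkept hslots (by omega) hun harena' hbits, hobj, hkept⟩
  exact
    { entry := hfr.entry
      rip := hrip
      rsp := hrsp
      shadowIdx := by
        rw [hslots.u64 (g.R + 8) (by omega) (by omega) (by omega)]
        exact hfr.shadowIdx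
      saved_rbx := by
        rw [hsaved.u64 (g.R + 0x598) (by omega) (by omega) hR64]
        exact hfr.saved_rbx
      saved_rbp := by
        rw [hsaved.u64 (g.R + 0x5a0) (by omega) (by omega) hR64]
        exact hfr.saved_rbp
      saved_r12 := by
        rw [hsaved.u64 (g.R + 0x5a8) (by omega) (by omega) hR64]
        exact hfr.saved_r12
      saved_r13 := by
        rw [hsaved.u64 (g.R + 0x5b0) (by omega) (by omega) hR64]
        exact hfr.saved_r13
      saved_r14 := by
        rw [hsaved.u64 (g.R + 0x5b8) (by omega) (by omega) hR64]
        exact hfr.saved_r14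
      saved_r15 := by
        rw [hsaved.u64 (g.R + 0x5c0) (by omega) (by omega) hR64]
        exact hfr.saved_r15
      saved_ra := by
        rw [hsaved.u64 (g.R + 0x5c8) (by omega) (by omega) hR64]
        exact hfr.saved_ra
      code := hcode
      inv := hinv
      shadow := hfr.shadow.untouched hun
      offText := hfr.offText
      ext := hfr.ext
      callers := hfr.callers
      sh7 := log2_frame hfr.sh7 hlog
      same := by
        apply hfr.same.step_same hs
        intro s hsm a h1 h2
        have := (hspan s hsm).2
        unfold footprint writes
        rcases this with hst | hfl
        · refine ⟨⟨g.RA - depth, g.RA⟩, List.mem_cons_self, ?_, ?_⟩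
          · simp only [depth]
            omega
          · simp only []
            omega
        · refine ⟨(objBlock (g.e.reg .rdi).toNat).span, List.mem_cons_of_mem _ List.mem_cons_self, ?_, ?_⟩
          · have e : (g.e.reg .rdi).toNat = g.f := rfl
            simp only [vblock, voff, e]
            omega
          · have e : (g.e.reg .rdi).toNat = g.f := rfl
            simp only [vblock, voff, e]
            omega }

/-- **Back to `SD4 i`** (the exits at a loop head: `AtC16`): the carried clauses and `temps = []` (memory-independent). -/
theorem Carry.sd4 {g : Ghost} {i : Nat} {A2 A3 : Arena} {A : Arena × List Obj} {mem : Mem}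
    (hc : Carry g i A2 A3 A mem) (hno : A.1.temps = []) :
    Real.SD4 g.len i A (g.Blk A) (g.Live A) mem g.f g.R := by
  have hown := hc.ages.upTo
  have hcm : CommentsOK (g.Blk A) mem g.f :=
    CommentsOK.reblk (hown.own.comment (by omega)) (fun B _ hB => up g A B hB)
  exact
    { toSD := hc.sdw.toSD (by omega) hno (fun h1 => absurd h1 (by omega)) (fun _ => hcm)
      done := ⟨(hc.sdw.cb0 (by omega)).1, (hc.sdw.cb0 (by omega)).2, hc.ages.n_le,
        fun j hj => CodebookOK.reblk (hown.books j hj) (fun B _ hB => up g A B hB)⟩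
      zf := hc.zf }

/-- **The exit `AtC16`** (0x1151bf, `count ≤ i`) from the common part at that address and the carried clauses. -/
theorem Carry.toC16 {u₀ : State} {g : Ghost} {i : Nat} {A2 A3 : Arena} {A : Arena × List Obj} {w : State}
    (hfr : Frame u₀ g pc_C16 A w) (hh : g.Hand A) (hc : Carry g i A2 A3 A w.mem) (hno : A.1.temps = [])
    (hge : stb_vorbis.codebook_count w.mem g.f ≤ (i : Int)) : AtC16 u₀ g w := by
  refine ⟨A, i, hfr, hh, hc.slot_f, ?_, hc.sd4 hno, A2, A3, hc.ages⟩
  have := hc.ages.n_le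
  omega

/-- **The assertion of segment C2 at its inner cut points** (the returns of its calls, before the `lengths` allocation): the common
part, the hand-over carrier, the carried clauses, `temps = []`, `i < count`, and `r14 = c = cb(i)` as a number. `bound`: the
result of the `get_bits` that just returned is below it (`z < 2^n` of the callee's post). -/
structure InC2 (u₀ : State) (g : Ghost) (i : Nat) (A2 A3 : Arena) (A : Arena × List Obj) (pc : Word) (bound : Nat) (v : State) :
    Prop where
  frame : Frame u₀ g pc A v
  hand : g.Hand A
  carry : Carry g i A2 A3 A v.mem
  noTemps : A.1.temps = []
  lt : (i : Int) < stb_vorbis.codebook_count v.mem g.f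
  r14 : v.reg .r14 = addr (g.cb v.mem i)
  rax : (v.reg .rax).toNat < bound

/-- **The head of segment C2** (0x114298 … 0x1142b3 `jle` → `AtC16`; … 0x1142e5 `call get_bits` … 0x1142ea = `cut82`). -/
theorem headC2 {Lay : Layout} (hLay : Lay.hi = 0x1000000) {μ : Microarch} (hμ : UserX.MicroOK μ) {u₀ : State}
    (hcode : HasCodeNat Lay u₀ Vorbis.L.start_decoder.entry Vorbis.Code.code_start_decoder.nat Vorbis.L.start_decoder.size)
    (hld4 : Asan.SmallCheck Lay μ Vorbis.WayInv (Vorbis.CodeOK u₀) [.rax, .rcx, .rdx] 4 Vorbis.L.__asan_load4_noabort.entry)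
    (hld8 : Asan.SmallCheck Lay μ Vorbis.WayInv (Vorbis.CodeOK u₀) [.rax, .rcx, .rdx] 8 Vorbis.L.__asan_load8_noabort.entry)
    (h_get_bits : ∀ (others : List Obj) (frames : List (Nat × FrameLayout)) (Blk : Block → Prop) (len : Nat),
      Calls Lay μ Vorbis.WayInv (Vorbis.conv u₀) Vorbis.L.get_bits.entry (Vorbis.Spec.get_bits.spec others frames Blk len))
    (g : Ghost) (i : Nat) (v : State) (A : Arena × List Obj) (hb : BodyC2 u₀ g i A v) :
    ReachVia Lay μ WayInv v (fun w => AtC16 u₀ g w ∨ ∃ A2 A3, InC2 u₀ g i A2 A3 A Vorbis.L.start_decoder.cut82 256 w) := by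
  have hfr := hb.frame
  have he := hfr.entry
  obtain ⟨A2, A3, hcar⟩ := Carry.of_body hb
  have hno : A.1.temps = [] := hb.sd.noTemps
  v_entry he
  simp only [depth] at he_room he_stack
  have hgb := h_get_bits A.2 g.frames' (g.Blk A) g.len
  have hwhere := f_where hfr hb.hand
  have hRA : g.RA = (g.e.reg .rsp).toNat := rfl
  rw [hRA] at hwhere
  have hcntle := hb.sd.done.upto
  have hF1 := hcar.ages.F1
  have w_rip : v.rip = Vorbis.L.start_decoder.cut81 := hfr.rip
  have hv_rsp : v.reg .rsp = g.e.reg .rsp - 1480 := by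
    rw [hfr.rsp]
    unfold Ghost.R Ghost.RA steady
    have := slot_word (g.e.reg .rsp) 0 (by omega) (by omega)
    simpa using this
  have w_eq : Mem.EqOn Vorbis.L.textLo Vorbis.L.textHi u₀.mem v.mem := hfr.code
  have hdf : v.flags .df = false := (show abiInv _ from hfr.inv).1
  have hmx : v.mxcsr &&& 0x1F80 = 0x1F80 := (show abiInv _ from hfr.inv).2
  have hsse := Vorbis.sseOK_of_abiInv hfr.inv
  have hv_f : v.mem.readLE (g.e.reg .rsp - 1456) 8 = g.f := by
    have := hb.slot_f
    unfold Mem.u64 Ghost.R Ghost.RA steady at this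
    rw [slot_word (g.e.reg .rsp) 0x18 (by omega) (by omega)] at this
    exact this
  have hv_i : v.mem.readLE (g.e.reg .rsp - 1432) 4 = i := by
    have := hb.slot_i
    unfold Mem.u32 Ghost.R Ghost.RA steady at this
    rw [slot_word (g.e.reg .rsp) 0x30 (by omega) (by omega)] at this
    exact this
  have hv_cnt : v.mem.readLE (UInt64.ofNat g.f + 160) 4 = v.mem.u32 (g.f + 160) := by
    unfold Mem.u32 addr
    rw [UInt64.ofNat_add]
    rfl
  have hv_cbs : v.mem.readLE (UInt64.ofNat g.f + 168) 8 = v.mem.u64 (g.f + 168) := by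
    unfold Mem.u64 addr
    rw [UInt64.ofNat_add]
    rfl
  have hl : LiveIn A.2 g.frames' g.f 1808 := hb.hand.obj.mono (sub_frames' g A)
  have hi32 : (BitVec.ofNat 32 i).toInt = (i : Int) := by
    rw [toInt_ofNat32 i (by omega)]
    unfold sint32
    rw [if_pos (by omega)]
  have hcnt32 : (BitVec.ofNat 32 (v.mem.u32 (g.f + 160))).toInt = stb_vorbis.codebook_count v.mem g.f := by
    rw [X86.User.Mem.toInt_ofNat32_u32]
    simp only [vacc, voff]
  u_walk hcode [hμ.vendor] until [Vorbis.L.start_decoder.cut181, Vorbis.L.start_decoder.cut82] span [Vorbis.L.textLo, Vorbis.L.textHi] side (v_side)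
  · -- 0x1142a4 check load4 f+0xa0 (line 3746 `f->codebook_count`): inside `*f`
    have hun : ShadowUntouched v.mem s_1142a4.mem := by v_untouched
    exact hl.accSmall hfr.shadow hun _ 4 (by decide) (by u_omega) (by u_omega)
  · -- 0x1142c5 check load8 f+0xa8 (line 3751 `f->codebooks`): inside `*f`
    have hun : ShadowUntouched v.mem s_1142c5.mem := by v_untouched
    exact hl.accSmall hfr.shadow hun _ 8 (by decide) (by u_omega) (by u_omega)
  · v_inv
  · -- the precondition of get_bits(f, 8) at 0x1142e5
    have hun : ShadowUntouched v.mem s_1142e5.mem := by v_untouched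
    have hrdi : (s_1142e5.reg .rdi).toNat = g.f := by
      rw [w_rdi]
      u_omega
    refine ⟨⟨shadowPre_call hfr ?_ hun, ?_, ?_⟩, ?_⟩
    · rw [w_rsp]
      unfold Ghost.R Ghost.RA steady
      u_omega
    · rw [hrdi]
      exact readerEnv hb.hand hb.sd.env.live
    · rw [hrdi, w_mem]
      exact (Reader.store_off_obj hb.sd.bits _ 8 _ (by u_omega) (by u_omega)).1.bits
    · rw [bitsArg_def, w_rsi]
      decide
  · -- exit at 0x1151bf (line 3746, `count ≤ i`): AtC16
    have hs : Mem.SameExcept [⟨(g.e.reg .rsp).toNat - 1888, (g.e.reg .rsp).toNat - 1480⟩] v.mem s_1142b3.mem := by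
      u_same
    have hbits : Bits (g.Blk A) g.len s_1142b3.mem g.f := by
      rw [w_mem]
      exact (Reader.store_off_obj hb.sd.bits _ 8 _ (by u_omega) (by u_omega)).1.bits
    have hrsp : s_1142b3.reg .rsp = addr g.R := by
      rw [w_rsp, ← hv_rsp, hfr.rsp]
    have hinv : abiInv s_1142b3 := by v_inv
    obtain ⟨hfr', hcar', hobj', _⟩ := stepC (pc' := pc_C16) hfr hb.hand hcar hs (by
      intro s hsm
      rw [List.mem_singleton] at hsm
      subst hsm
      left
      unfold Ghost.R Ghost.RA steady depth
      simp only []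
      omega) w_rip hrsp w_eq hinv hbits
    refine ReachVia.done (Or.inl (Carry.toC16 hfr' hb.hand hcar' hno ?_))
    have ecnt : stb_vorbis.codebook_count s_1142b3.mem g.f = stb_vorbis.codebook_count v.mem g.f := by
      simp only [vacc, voff]
      exact hobj'.i32 160 (by decide)
    rw [ecnt]
    rw [hcnt32, hi32] at hbr_1142b3
    exact hbr_1142b3
  · -- 0x1142ea (`cut82`), after get_bits(f, 8) returned
    have hlt : (i : Int) < stb_vorbis.codebook_count v.mem g.f := by
      rw [hcnt32, hi32] at hbr_1142b3
      omega
    have hrdi : (s_1142e5.reg .rdi).toNat = g.f := by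
      rw [w_rdi_1142e5]
      u_omega
    have harg : bitsArg s_1142e5 = 8 := by
      rw [bitsArg_def, w_rsi_1142e5]
      decide
    have hpost : GetBitsSpecPost (g.Blk A) g.len g.f 8 s_1142e5 s_1142e5r := by
      have := w_post
      simp only [get_bits.spec] at this
      rw [hrdi, harg] at this
      exact this
    v_after_call w_rsp_1142e5 w_mem_1142e5
    have hfN : (UInt64.ofNat g.f).toNat = g.f := by u_omega
    simp only [w_rdi_1142e5, hfN] at w_same
    have hs : Mem.SameExcept [⟨(g.e.reg .rsp).toNat - 1888, (g.e.reg .rsp).toNat - 1480⟩,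
        ⟨g.f + 48, g.f + 56⟩, ⟨g.f + 84, g.f + 96⟩, ⟨g.f + 136, g.f + 144⟩, ⟨g.f + 1484, g.f + 1749⟩,
        ⟨g.f + 1752, g.f + 1784⟩] v.mem s_1142e5r.mem := by
      u_same
    have hrsp : s_1142e5r.reg .rsp = addr g.R := by
      rw [w_rsp, ← hv_rsp, hfr.rsp]
    have hinv : abiInv s_1142e5r := w_inv
    obtain ⟨hfr', hcar', hobj', _⟩ := stepC (pc' := Vorbis.L.start_decoder.cut82) hfr hb.hand hcar hs (by
      intro s hsm
      simp only [List.mem_cons, List.mem_nil_iff, or_false] at hsm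
      unfold OKSpan Ghost.R Ghost.RA steady depth
      rcases hsm with rfl | rfl | rfl | rfl | rfl | rfl <;> simp only [] <;> omega) w_rip hrsp w_eq hinv hpost.bits.bits
    have ecnt : stb_vorbis.codebook_count s_1142e5r.mem g.f = stb_vorbis.codebook_count v.mem g.f := by
      simp only [vacc, voff]
      exact hobj'.i32 160 (by decide)
    have ecbs : stb_vorbis.codebooks s_1142e5r.mem g.f = stb_vorbis.codebooks v.mem g.f := by
      simp only [vacc, voff]
      exact hobj'.u64 168 (by decide)
    refine ReachVia.done (Or.inr ⟨A2, A3, hfr', hb.hand, hcar', hno, by rw [ecnt]; exact hlt, ?_, ?_⟩)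
    · -- r14 = cb(i) = codebooks + 2120·i
      rw [w_r14]
      unfold Ghost.cb stb_vorbis.codebooks_at
      rw [ecbs]
      have e1 : Word.ofBV (BitVec.signExtend 64 (BitVec.ofNat 32 i)) = addr i := by
        apply eq_addr
        rw [toNat_sext32 _ (by rw [toNat_ofNat32 i (by omega)]; omega), toNat_ofNat32 i (by omega)]
      have e2 : stb_vorbis.codebooks v.mem g.f = v.mem.u64 (g.f + 168) := by
        simp only [vacc, voff]
      rw [e1, e2]
      simp only [vfield, voff]
      have e3 : i * 2120 + v.mem.u64 (g.f + 168) = v.mem.u64 (g.f + 168) + 2120 * i := by omega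
      rw [e3]
    · have := hpost.bits.result.2 (by omega)
      omega

/-- **An error exit of segment C2 before the allocation** (`AtERR` with eax = 0): SD.ERR from the carried clauses (`SDw.failed`). -/
theorem Carry.toERR {u₀ : State} {g : Ghost} {i : Nat} {A2 A3 : Arena} {A : Arena × List Obj} {w : State}
    (hfr : Frame u₀ g pc_ERR A w) (hh : g.Hand A) (hc : Carry g i A2 A3 A w.mem)
    (hax : (w.reg .rax).toNat % 2 ^ 32 = 0) : AtERR u₀ g w := by
  have hcm : CommentsOK (g.Blk A) w.mem g.f :=
    CommentsOK.reblk (hc.ages.upTo.own.comment (by omega)) (fun B _ hB => up g A B hB)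
  exact ⟨A, hfr, hh, Or.inl ⟨hax, hc.sdw.failed (by omega) (CommentsOK.h1 hcm)⟩⟩

/-- **Line 3753** (`cut82` 0x1142ea: `cmp al, 0x42 ; jne` ERRSTUB(0x14) at 0x114439 → `AtERR`; else `get_bits(f, 8)` → `cut83` 0x114301). -/
theorem sync1 {Lay : Layout} (hLay : Lay.hi = 0x1000000) {μ : Microarch} (hμ : UserX.MicroOK μ) {u₀ : State}
    (hcode : HasCodeNat Lay u₀ Vorbis.L.start_decoder.entry Vorbis.Code.code_start_decoder.nat Vorbis.L.start_decoder.size)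
    (h_get_bits : ∀ (others : List Obj) (frames : List (Nat × FrameLayout)) (Blk : Block → Prop) (len : Nat),
      Calls Lay μ Vorbis.WayInv (Vorbis.conv u₀) Vorbis.L.get_bits.entry (Vorbis.Spec.get_bits.spec others frames Blk len))
    (h_error : ∀ (others : List Obj) (frames : List (Nat × FrameLayout)),
      Calls Lay μ Vorbis.WayInv (Vorbis.conv u₀) Vorbis.L.error.entry (Vorbis.Spec.error.spec others frames))
    (g : Ghost) (i : Nat) (v : State) (A2 A3 : Arena) (A : Arena × List Obj) (b : Nat)
    (hin : InC2 u₀ g i A2 A3 A Vorbis.L.start_decoder.cut82 b v) :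
    ReachVia Lay μ WayInv v (fun w => AtERR u₀ g w ∨ InC2 u₀ g i A2 A3 A Vorbis.L.start_decoder.cut83 256 w) := by
  have hfr := hin.frame
  have hcar := hin.carry
  have hh := hin.hand
  have he := hfr.entry
  v_entry he
  simp only [depth] at he_room he_stack
  have hgb := h_get_bits A.2 g.frames' (g.Blk A) g.len
  have herr := h_error A.2 g.frames'
  have hwhere := f_where hfr hh
  have hRA : g.RA = (g.e.reg .rsp).toNat := rfl
  rw [hRA] at hwhere
  have w_rip : v.rip = Vorbis.L.start_decoder.cut82 := hfr.rip
  have hv_rsp : v.reg .rsp = g.e.reg .rsp - 1480 := by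
    rw [hfr.rsp]
    unfold Ghost.R Ghost.RA steady
    have := slot_word (g.e.reg .rsp) 0 (by omega) (by omega)
    simpa using this
  have w_eq : Mem.EqOn Vorbis.L.textLo Vorbis.L.textHi u₀.mem v.mem := hfr.code
  have hdf : v.flags .df = false := (show abiInv _ from hfr.inv).1
  have hmx : v.mxcsr &&& 0x1F80 = 0x1F80 := (show abiInv _ from hfr.inv).2
  have hsse := Vorbis.sseOK_of_abiInv hfr.inv
  have hv_f : v.mem.readLE (g.e.reg .rsp - 1456) 8 = g.f := by
    have := hcar.slot_f
    unfold Mem.u64 Ghost.R Ghost.RA steady at this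
    rw [slot_word (g.e.reg .rsp) 0x18 (by omega) (by omega)] at this
    exact this
  have hl : LiveIn A.2 g.frames' g.f 1808 := hh.obj.mono (sub_frames' g A)
  have hfN : (UInt64.ofNat g.f).toNat = g.f := by u_omega
  have hbits0 := hcar.sdw.bits
  u_walk hcode [hμ.vendor] until [Vorbis.L.start_decoder.cut4, Vorbis.L.start_decoder.cut83] span [Vorbis.L.textLo, Vorbis.L.textHi] side (v_side)
  · v_inv
  · -- the precondition of error(f, VORBIS_invalid_setup) at 0x114446
    have hun : ShadowUntouched v.mem s_114446.mem := by v_untouched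
    have hrdi : (s_114446.reg .rdi).toNat = g.f := by
      rw [w_rdi]
      exact hfN
    refine ⟨shadowPre_call hfr ?_ hun, ?_⟩
    · rw [w_rsp]
      unfold Ghost.R Ghost.RA steady
      u_omega
    · rw [hrdi]
      exact hl
  · v_inv
  · -- the precondition of get_bits(f, 8) at 0x1142fc
    have hun : ShadowUntouched v.mem s_1142fc.mem := by v_untouched
    have hrdi : (s_1142fc.reg .rdi).toNat = g.f := by
      rw [w_rdi]
      exact hfN
    refine ⟨⟨shadowPre_call hfr ?_ hun, ?_, ?_⟩, ?_⟩
    · rw [w_rsp]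
      unfold Ghost.R Ghost.RA steady
      u_omega
    · rw [hrdi]
      exact readerEnv hh hcar.sdw.env.live
    · rw [hrdi, w_mem]
      exact (Reader.store_off_obj hbits0 _ 8 _ (by u_omega) (by u_omega)).1.bits
    · rw [bitsArg_def, w_rsi]
      decide
  · -- after error returned (0x11444b `jmp 113b22`): the exit AtERR with eax = 0
    obtain ⟨hrax, hunp, _⟩ := w_post
    v_after_call w_rsp_114446 w_mem_114446
    simp only [w_rdi_114446, hfN, voff] at w_same
    have hs : Mem.SameExcept [⟨(g.e.reg .rsp).toNat - 1888, (g.e.reg .rsp).toNat - 1480⟩,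
        ⟨g.f + 140, g.f + 144⟩] v.mem s_114446r.mem := by
      u_same
    have w_rax : s_114446r.reg .rax = 0 := hrax
    u_walk hcode [hμ.vendor] until [Vorbis.L.start_decoder.cut4] span [Vorbis.L.textLo, Vorbis.L.textHi] side (v_side)
    have hs' : Mem.SameExcept [⟨(g.e.reg .rsp).toNat - 1888, (g.e.reg .rsp).toNat - 1480⟩,
        ⟨g.f + 140, g.f + 144⟩] v.mem s_11444b.mem := by
      rw [w_mem]
      exact hs
    have hrsp : s_11444b.reg .rsp = addr g.R := by
      rw [w_rsp, ← hv_rsp, hfr.rsp]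
    have hinv : abiInv s_11444b := by v_inv
    have hbits : Bits (g.Blk A) g.len s_11444b.mem g.f := by
      apply hbits0.frame_fields
      apply Bits.SameFields.of_sameExcept hs'
      all_goals
        intro s hsm
        simp only [List.mem_cons, List.mem_nil_iff, or_false] at hsm
        rcases hsm with rfl | rfl <;> simp only [] <;> omega
    obtain ⟨hfr', hcar', _, _⟩ := stepC (pc' := pc_ERR) hfr hh hcar hs' (by
      intro s hsm
      simp only [List.mem_cons, List.mem_nil_iff, or_false] at hsm
      unfold OKSpan Ghost.R Ghost.RA steady depth
      rcases hsm with rfl | rfl <;> simp only [] <;> omega) w_rip hrsp w_eq hinv hbits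
    refine ReachVia.done (Or.inl (Carry.toERR hfr' hh hcar' ?_))
    rw [w_rax]
    rfl
  · -- 0x114301 (`cut83`), after get_bits(f, 8) returned
    have hrdi : (s_1142fc.reg .rdi).toNat = g.f := by
      rw [w_rdi_1142fc]
      exact hfN
    have harg : bitsArg s_1142fc = 8 := by
      rw [bitsArg_def, w_rsi_1142fc]
      decide
    have hpost : GetBitsSpecPost (g.Blk A) g.len g.f 8 s_1142fc s_1142fcr := by
      have := w_post
      simp only [get_bits.spec] at this
      rw [hrdi, harg] at this
      exact this
    v_after_call w_rsp_1142fc w_mem_1142fc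
    simp only [w_rdi_1142fc, hfN] at w_same
    have hs : Mem.SameExcept [⟨(g.e.reg .rsp).toNat - 1888, (g.e.reg .rsp).toNat - 1480⟩,
        ⟨g.f + 48, g.f + 56⟩, ⟨g.f + 84, g.f + 96⟩, ⟨g.f + 136, g.f + 144⟩, ⟨g.f + 1484, g.f + 1749⟩,
        ⟨g.f + 1752, g.f + 1784⟩] v.mem s_1142fcr.mem := by
      u_same
    have hrsp : s_1142fcr.reg .rsp = addr g.R := by
      rw [w_rsp, ← hv_rsp, hfr.rsp]
    have hinv : abiInv s_1142fcr := w_inv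
    obtain ⟨hfr', hcar', hobj', _⟩ := stepC (pc' := Vorbis.L.start_decoder.cut83) hfr hh hcar hs (by
      intro s hsm
      simp only [List.mem_cons, List.mem_nil_iff, or_false] at hsm
      unfold OKSpan Ghost.R Ghost.RA steady depth
      rcases hsm with rfl | rfl | rfl | rfl | rfl | rfl <;> simp only [] <;> omega) w_rip hrsp w_eq hinv hpost.bits.bits
    have ecnt : stb_vorbis.codebook_count s_1142fcr.mem g.f = stb_vorbis.codebook_count v.mem g.f := by
      simp only [vacc, voff]
      exact hobj'.i32 160 (by decide)
    have ecbs : stb_vorbis.codebooks s_1142fcr.mem g.f = stb_vorbis.codebooks v.mem g.f := by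
      simp only [vacc, voff]
      exact hobj'.u64 168 (by decide)
    refine ReachVia.done (Or.inr ⟨hfr', hh, hcar', hin.noTemps, by rw [ecnt]; exact hin.lt, ?_, ?_⟩)
    · rw [w_kept .r14 rfl, hin.r14]
      unfold Ghost.cb stb_vorbis.codebooks_at
      rw [ecbs]
    · have := hpost.bits.result.2 (by omega)
      omega

/-- **Line 3754** (`cut83` 0x114301: `cmp al, 0x43 ; jne` ERRSTUB(0x14) at 0x114450 → `AtERR`; else `get_bits(f, 8)` → `cut84` 0x114318). -/
theorem sync2 {Lay : Layout} (hLay : Lay.hi = 0x1000000) {μ : Microarch} (hμ : UserX.MicroOK μ) {u₀ : State}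
    (hcode : HasCodeNat Lay u₀ Vorbis.L.start_decoder.entry Vorbis.Code.code_start_decoder.nat Vorbis.L.start_decoder.size)
    (h_get_bits : ∀ (others : List Obj) (frames : List (Nat × FrameLayout)) (Blk : Block → Prop) (len : Nat),
      Calls Lay μ Vorbis.WayInv (Vorbis.conv u₀) Vorbis.L.get_bits.entry (Vorbis.Spec.get_bits.spec others frames Blk len))
    (h_error : ∀ (others : List Obj) (frames : List (Nat × FrameLayout)),
      Calls Lay μ Vorbis.WayInv (Vorbis.conv u₀) Vorbis.L.error.entry (Vorbis.Spec.error.spec others frames))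
    (g : Ghost) (i : Nat) (v : State) (A2 A3 : Arena) (A : Arena × List Obj) (b : Nat)
    (hin : InC2 u₀ g i A2 A3 A Vorbis.L.start_decoder.cut83 b v) :
    ReachVia Lay μ WayInv v (fun w => AtERR u₀ g w ∨ InC2 u₀ g i A2 A3 A Vorbis.L.start_decoder.cut84 256 w) := by
  have hfr := hin.frame
  have hcar := hin.carry
  have hh := hin.hand
  have he := hfr.entry
  v_entry he
  simp only [depth] at he_room he_stack
  have hgb := h_get_bits A.2 g.frames' (g.Blk A) g.len
  have herr := h_error A.2 g.frames'
  have hwhere := f_where hfr hh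
  have hRA : g.RA = (g.e.reg .rsp).toNat := rfl
  rw [hRA] at hwhere
  have w_rip : v.rip = Vorbis.L.start_decoder.cut83 := hfr.rip
  have hv_rsp : v.reg .rsp = g.e.reg .rsp - 1480 := by
    rw [hfr.rsp]
    unfold Ghost.R Ghost.RA steady
    have := slot_word (g.e.reg .rsp) 0 (by omega) (by omega)
    simpa using this
  have w_eq : Mem.EqOn Vorbis.L.textLo Vorbis.L.textHi u₀.mem v.mem := hfr.code
  have hdf : v.flags .df = false := (show abiInv _ from hfr.inv).1
  have hmx : v.mxcsr &&& 0x1F80 = 0x1F80 := (show abiInv _ from hfr.inv).2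
  have hsse := Vorbis.sseOK_of_abiInv hfr.inv
  have hv_f : v.mem.readLE (g.e.reg .rsp - 1456) 8 = g.f := by
    have := hcar.slot_f
    unfold Mem.u64 Ghost.R Ghost.RA steady at this
    rw [slot_word (g.e.reg .rsp) 0x18 (by omega) (by omega)] at this
    exact this
  have hl : LiveIn A.2 g.frames' g.f 1808 := hh.obj.mono (sub_frames' g A)
  have hfN : (UInt64.ofNat g.f).toNat = g.f := by u_omega
  have hbits0 := hcar.sdw.bits
  u_walk hcode [hμ.vendor] until [Vorbis.L.start_decoder.cut4, Vorbis.L.start_decoder.cut84] span [Vorbis.L.textLo, Vorbis.L.textHi] side (v_side)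
  · v_inv
  · -- the precondition of error(f, VORBIS_invalid_setup) at 0x11445d
    have hun : ShadowUntouched v.mem s_11445d.mem := by v_untouched
    have hrdi : (s_11445d.reg .rdi).toNat = g.f := by
      rw [w_rdi]
      exact hfN
    refine ⟨shadowPre_call hfr ?_ hun, ?_⟩
    · rw [w_rsp]
      unfold Ghost.R Ghost.RA steady
      u_omega
    · rw [hrdi]
      exact hl
  · v_inv
  · -- the precondition of get_bits(f, 8) at 0x114313
    have hun : ShadowUntouched v.mem s_114313.mem := by v_untouched
    have hrdi : (s_114313.reg .rdi).toNat = g.f := by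
      rw [w_rdi]
      exact hfN
    refine ⟨⟨shadowPre_call hfr ?_ hun, ?_, ?_⟩, ?_⟩
    · rw [w_rsp]
      unfold Ghost.R Ghost.RA steady
      u_omega
    · rw [hrdi]
      exact readerEnv hh hcar.sdw.env.live
    · rw [hrdi, w_mem]
      exact (Reader.store_off_obj hbits0 _ 8 _ (by u_omega) (by u_omega)).1.bits
    · rw [bitsArg_def, w_rsi]
      decide
  · -- after error returned (0x114462 `jmp 113b22`): the exit AtERR with eax = 0
    obtain ⟨hrax, hunp, _⟩ := w_post
    v_after_call w_rsp_11445d w_mem_11445d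
    simp only [w_rdi_11445d, hfN, voff] at w_same
    have hs : Mem.SameExcept [⟨(g.e.reg .rsp).toNat - 1888, (g.e.reg .rsp).toNat - 1480⟩,
        ⟨g.f + 140, g.f + 144⟩] v.mem s_11445dr.mem := by
      u_same
    have w_rax : s_11445dr.reg .rax = 0 := hrax
    u_walk hcode [hμ.vendor] until [Vorbis.L.start_decoder.cut4] span [Vorbis.L.textLo, Vorbis.L.textHi] side (v_side)
    have hs' : Mem.SameExcept [⟨(g.e.reg .rsp).toNat - 1888, (g.e.reg .rsp).toNat - 1480⟩,
        ⟨g.f + 140, g.f + 144⟩] v.mem s_114462.mem := by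
      rw [w_mem]
      exact hs
    have hrsp : s_114462.reg .rsp = addr g.R := by
      rw [w_rsp, ← hv_rsp, hfr.rsp]
    have hinv : abiInv s_114462 := by v_inv
    have hbits : Bits (g.Blk A) g.len s_114462.mem g.f := by
      apply hbits0.frame_fields
      apply Bits.SameFields.of_sameExcept hs'
      all_goals
        intro s hsm
        simp only [List.mem_cons, List.mem_nil_iff, or_false] at hsm
        rcases hsm with rfl | rfl <;> simp only [] <;> omega
    obtain ⟨hfr', hcar', _, _⟩ := stepC (pc' := pc_ERR) hfr hh hcar hs' (by
      intro s hsm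
      simp only [List.mem_cons, List.mem_nil_iff, or_false] at hsm
      unfold OKSpan Ghost.R Ghost.RA steady depth
      rcases hsm with rfl | rfl <;> simp only [] <;> omega) w_rip hrsp w_eq hinv hbits
    refine ReachVia.done (Or.inl (Carry.toERR hfr' hh hcar' ?_))
    rw [w_rax]
    rfl
  · -- 0x114301 (`cut84`), after get_bits(f, 8) returned
    have hrdi : (s_114313.reg .rdi).toNat = g.f := by
      rw [w_rdi_114313]
      exact hfN
    have harg : bitsArg s_114313 = 8 := by
      rw [bitsArg_def, w_rsi_114313]
      decide
    have hpost : GetBitsSpecPost (g.Blk A) g.len g.f 8 s_114313 s_114313r := by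
      have := w_post
      simp only [get_bits.spec] at this
      rw [hrdi, harg] at this
      exact this
    v_after_call w_rsp_114313 w_mem_114313
    simp only [w_rdi_114313, hfN] at w_same
    have hs : Mem.SameExcept [⟨(g.e.reg .rsp).toNat - 1888, (g.e.reg .rsp).toNat - 1480⟩,
        ⟨g.f + 48, g.f + 56⟩, ⟨g.f + 84, g.f + 96⟩, ⟨g.f + 136, g.f + 144⟩, ⟨g.f + 1484, g.f + 1749⟩,
        ⟨g.f + 1752, g.f + 1784⟩] v.mem s_114313r.mem := by
      u_same
    have hrsp : s_114313r.reg .rsp = addr g.R := by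
      rw [w_rsp, ← hv_rsp, hfr.rsp]
    have hinv : abiInv s_114313r := w_inv
    obtain ⟨hfr', hcar', hobj', _⟩ := stepC (pc' := Vorbis.L.start_decoder.cut84) hfr hh hcar hs (by
      intro s hsm
      simp only [List.mem_cons, List.mem_nil_iff, or_false] at hsm
      unfold OKSpan Ghost.R Ghost.RA steady depth
      rcases hsm with rfl | rfl | rfl | rfl | rfl | rfl <;> simp only [] <;> omega) w_rip hrsp w_eq hinv hpost.bits.bits
    have ecnt : stb_vorbis.codebook_count s_114313r.mem g.f = stb_vorbis.codebook_count v.mem g.f := by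
      simp only [vacc, voff]
      exact hobj'.i32 160 (by decide)
    have ecbs : stb_vorbis.codebooks s_114313r.mem g.f = stb_vorbis.codebooks v.mem g.f := by
      simp only [vacc, voff]
      exact hobj'.u64 168 (by decide)
    refine ReachVia.done (Or.inr ⟨hfr', hh, hcar', hin.noTemps, by rw [ecnt]; exact hin.lt, ?_, ?_⟩)
    · rw [w_kept .r14 rfl, hin.r14]
      unfold Ghost.cb stb_vorbis.codebooks_at
      rw [ecbs]
    · have := hpost.bits.result.2 (by omega)
      omega

/-- `InC2` from `cut85` on: `r15 = f` besides (loaded at 0x114325 from the spill slot, callee-saved through every call). -/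
structure In15 (u₀ : State) (g : Ghost) (i : Nat) (A2 A3 : Arena) (A : Arena × List Obj) (pc : Word) (bound : Nat) (v : State) :
    Prop extends InC2 u₀ g i A2 A3 A pc bound v where
  r15 : v.reg .r15 = addr g.f

/-- **Lines 3755, 3756** (`cut84` 0x114318: `cmp al, 0x56 ; jne` ERRSTUB(0x14) at 0x114467 → `AtERR`; else `r15 = f`, `get_bits(f, 8)` → `cut85` 0x114332). -/
theorem sync3 {Lay : Layout} (hLay : Lay.hi = 0x1000000) {μ : Microarch} (hμ : UserX.MicroOK μ) {u₀ : State}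
    (hcode : HasCodeNat Lay u₀ Vorbis.L.start_decoder.entry Vorbis.Code.code_start_decoder.nat Vorbis.L.start_decoder.size)
    (h_get_bits : ∀ (others : List Obj) (frames : List (Nat × FrameLayout)) (Blk : Block → Prop) (len : Nat),
      Calls Lay μ Vorbis.WayInv (Vorbis.conv u₀) Vorbis.L.get_bits.entry (Vorbis.Spec.get_bits.spec others frames Blk len))
    (h_error : ∀ (others : List Obj) (frames : List (Nat × FrameLayout)),
      Calls Lay μ Vorbis.WayInv (Vorbis.conv u₀) Vorbis.L.error.entry (Vorbis.Spec.error.spec others frames))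
    (g : Ghost) (i : Nat) (v : State) (A2 A3 : Arena) (A : Arena × List Obj) (b : Nat)
    (hin : InC2 u₀ g i A2 A3 A Vorbis.L.start_decoder.cut84 b v) :
    ReachVia Lay μ WayInv v (fun w => AtERR u₀ g w ∨ In15 u₀ g i A2 A3 A Vorbis.L.start_decoder.cut85 256 w) := by
  have hfr := hin.frame
  have hcar := hin.carry
  have hh := hin.hand
  have he := hfr.entry
  v_entry he
  simp only [depth] at he_room he_stack
  have hgb := h_get_bits A.2 g.frames' (g.Blk A) g.len
  have herr := h_error A.2 g.frames'
  have hwhere := f_where hfr hh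
  have hRA : g.RA = (g.e.reg .rsp).toNat := rfl
  rw [hRA] at hwhere
  have w_rip : v.rip = Vorbis.L.start_decoder.cut84 := hfr.rip
  have hv_rsp : v.reg .rsp = g.e.reg .rsp - 1480 := by
    rw [hfr.rsp]
    unfold Ghost.R Ghost.RA steady
    have := slot_word (g.e.reg .rsp) 0 (by omega) (by omega)
    simpa using this
  have w_eq : Mem.EqOn Vorbis.L.textLo Vorbis.L.textHi u₀.mem v.mem := hfr.code
  have hdf : v.flags .df = false := (show abiInv _ from hfr.inv).1
  have hmx : v.mxcsr &&& 0x1F80 = 0x1F80 := (show abiInv _ from hfr.inv).2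
  have hsse := Vorbis.sseOK_of_abiInv hfr.inv
  have hv_f : v.mem.readLE (g.e.reg .rsp - 1456) 8 = g.f := by
    have := hcar.slot_f
    unfold Mem.u64 Ghost.R Ghost.RA steady at this
    rw [slot_word (g.e.reg .rsp) 0x18 (by omega) (by omega)] at this
    exact this
  have hl : LiveIn A.2 g.frames' g.f 1808 := hh.obj.mono (sub_frames' g A)
  have hfN : (UInt64.ofNat g.f).toNat = g.f := by u_omega
  have hbits0 := hcar.sdw.bits
  u_walk hcode [hμ.vendor] until [Vorbis.L.start_decoder.cut4, Vorbis.L.start_decoder.cut85] span [Vorbis.L.textLo, Vorbis.L.textHi] side (v_side)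
  · v_inv
  · -- the precondition of error(f, VORBIS_invalid_setup) at 0x114474
    have hun : ShadowUntouched v.mem s_114474.mem := by v_untouched
    have hrdi : (s_114474.reg .rdi).toNat = g.f := by
      rw [w_rdi]
      exact hfN
    refine ⟨shadowPre_call hfr ?_ hun, ?_⟩
    · rw [w_rsp]
      unfold Ghost.R Ghost.RA steady
      u_omega
    · rw [hrdi]
      exact hl
  · v_inv
  · -- the precondition of get_bits(f, 8) at 0x11432d
    have hun : ShadowUntouched v.mem s_11432d.mem := by v_untouched
    have hrdi : (s_11432d.reg .rdi).toNat = g.f := by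
      rw [w_rdi]
      exact hfN
    refine ⟨⟨shadowPre_call hfr ?_ hun, ?_, ?_⟩, ?_⟩
    · rw [w_rsp]
      unfold Ghost.R Ghost.RA steady
      u_omega
    · rw [hrdi]
      exact readerEnv hh hcar.sdw.env.live
    · rw [hrdi, w_mem]
      exact (Reader.store_off_obj hbits0 _ 8 _ (by u_omega) (by u_omega)).1.bits
    · rw [bitsArg_def, w_rsi]
      decide
  · -- after error returned (0x114479 `jmp 113b22`): the exit AtERR with eax = 0
    obtain ⟨hrax, hunp, _⟩ := w_post
    v_after_call w_rsp_114474 w_mem_114474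
    simp only [w_rdi_114474, hfN, voff] at w_same
    have hs : Mem.SameExcept [⟨(g.e.reg .rsp).toNat - 1888, (g.e.reg .rsp).toNat - 1480⟩,
        ⟨g.f + 140, g.f + 144⟩] v.mem s_114474r.mem := by
      u_same
    have w_rax : s_114474r.reg .rax = 0 := hrax
    u_walk hcode [hμ.vendor] until [Vorbis.L.start_decoder.cut4] span [Vorbis.L.textLo, Vorbis.L.textHi] side (v_side)
    have hs' : Mem.SameExcept [⟨(g.e.reg .rsp).toNat - 1888, (g.e.reg .rsp).toNat - 1480⟩,
        ⟨g.f + 140, g.f + 144⟩] v.mem s_114479.mem := by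
      rw [w_mem]
      exact hs
    have hrsp : s_114479.reg .rsp = addr g.R := by
      rw [w_rsp, ← hv_rsp, hfr.rsp]
    have hinv : abiInv s_114479 := by v_inv
    have hbits : Bits (g.Blk A) g.len s_114479.mem g.f := by
      apply hbits0.frame_fields
      apply Bits.SameFields.of_sameExcept hs'
      all_goals
        intro s hsm
        simp only [List.mem_cons, List.mem_nil_iff, or_false] at hsm
        rcases hsm with rfl | rfl <;> simp only [] <;> omega
    obtain ⟨hfr', hcar', _, _⟩ := stepC (pc' := pc_ERR) hfr hh hcar hs' (by
      intro s hsm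
      simp only [List.mem_cons, List.mem_nil_iff, or_false] at hsm
      unfold OKSpan Ghost.R Ghost.RA steady depth
      rcases hsm with rfl | rfl <;> simp only [] <;> omega) w_rip hrsp w_eq hinv hbits
    refine ReachVia.done (Or.inl (Carry.toERR hfr' hh hcar' ?_))
    rw [w_rax]
    rfl
  · -- 0x114301 (`cut85`), after get_bits(f, 8) returned
    have hrdi : (s_11432d.reg .rdi).toNat = g.f := by
      rw [w_rdi_11432d]
      exact hfN
    have harg : bitsArg s_11432d = 8 := by
      rw [bitsArg_def, w_rsi_11432d]
      decide
    have hpost : GetBitsSpecPost (g.Blk A) g.len g.f 8 s_11432d s_11432dr := by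
      have := w_post
      simp only [get_bits.spec] at this
      rw [hrdi, harg] at this
      exact this
    v_after_call w_rsp_11432d w_mem_11432d
    simp only [w_rdi_11432d, hfN] at w_same
    have hs : Mem.SameExcept [⟨(g.e.reg .rsp).toNat - 1888, (g.e.reg .rsp).toNat - 1480⟩,
        ⟨g.f + 48, g.f + 56⟩, ⟨g.f + 84, g.f + 96⟩, ⟨g.f + 136, g.f + 144⟩, ⟨g.f + 1484, g.f + 1749⟩,
        ⟨g.f + 1752, g.f + 1784⟩] v.mem s_11432dr.mem := by
      u_same
    have hrsp : s_11432dr.reg .rsp = addr g.R := by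
      rw [w_rsp, ← hv_rsp, hfr.rsp]
    have hinv : abiInv s_11432dr := w_inv
    obtain ⟨hfr', hcar', hobj', _⟩ := stepC (pc' := Vorbis.L.start_decoder.cut85) hfr hh hcar hs (by
      intro s hsm
      simp only [List.mem_cons, List.mem_nil_iff, or_false] at hsm
      unfold OKSpan Ghost.R Ghost.RA steady depth
      rcases hsm with rfl | rfl | rfl | rfl | rfl | rfl <;> simp only [] <;> omega) w_rip hrsp w_eq hinv hpost.bits.bits
    have ecnt : stb_vorbis.codebook_count s_11432dr.mem g.f = stb_vorbis.codebook_count v.mem g.f := by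
      simp only [vacc, voff]
      exact hobj'.i32 160 (by decide)
    have ecbs : stb_vorbis.codebooks s_11432dr.mem g.f = stb_vorbis.codebooks v.mem g.f := by
      simp only [vacc, voff]
      exact hobj'.u64 168 (by decide)
    refine ReachVia.done (Or.inr ⟨⟨hfr', hh, hcar', hin.noTemps, by rw [ecnt]; exact hin.lt, ?_, ?_⟩, by rw [w_r15]; rfl⟩)
    · rw [w_kept .r14 rfl, hin.r14]
      unfold Ghost.cb stb_vorbis.codebooks_at
      rw [ecbs]
    · have := hpost.bits.result.2 (by omega)
      omega

/-- **Line 3757, first half** (`cut85` 0x114332: `mov ebx, eax` (x) ; `get_bits(f, 8)` with `rdi = r15` → `cut86` 0x114341). The value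
of `ebx` is not recorded: only its low byte is used (`movzx ebx, bl`), any byte will do for K1. -/
theorem dims1 {Lay : Layout} (hLay : Lay.hi = 0x1000000) {μ : Microarch} (hμ : UserX.MicroOK μ) {u₀ : State}
    (hcode : HasCodeNat Lay u₀ Vorbis.L.start_decoder.entry Vorbis.Code.code_start_decoder.nat Vorbis.L.start_decoder.size)
    (h_get_bits : ∀ (others : List Obj) (frames : List (Nat × FrameLayout)) (Blk : Block → Prop) (len : Nat),
      Calls Lay μ Vorbis.WayInv (Vorbis.conv u₀) Vorbis.L.get_bits.entry (Vorbis.Spec.get_bits.spec others frames Blk len))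
    (g : Ghost) (i : Nat) (v : State) (A2 A3 : Arena) (A : Arena × List Obj) (b : Nat)
    (hin : In15 u₀ g i A2 A3 A Vorbis.L.start_decoder.cut85 b v) :
    ReachVia Lay μ WayInv v (fun w => In15 u₀ g i A2 A3 A Vorbis.L.start_decoder.cut86 256 w) := by
  have hfr := hin.frame
  have hcar := hin.carry
  have hh := hin.hand
  have he := hfr.entry
  v_entry he
  simp only [depth] at he_room he_stack
  have hgb := h_get_bits A.2 g.frames' (g.Blk A) g.len
  have hwhere := f_where hfr hh
  have hRA : g.RA = (g.e.reg .rsp).toNat := rfl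
  rw [hRA] at hwhere
  have w_rip : v.rip = Vorbis.L.start_decoder.cut85 := hfr.rip
  have hv_rsp : v.reg .rsp = g.e.reg .rsp - 1480 := by
    rw [hfr.rsp]
    unfold Ghost.R Ghost.RA steady
    have := slot_word (g.e.reg .rsp) 0 (by omega) (by omega)
    simpa using this
  have hv_r15 : v.reg .r15 = UInt64.ofNat g.f := hin.r15
  have w_eq : Mem.EqOn Vorbis.L.textLo Vorbis.L.textHi u₀.mem v.mem := hfr.code
  have hdf : v.flags .df = false := (show abiInv _ from hfr.inv).1
  have hmx : v.mxcsr &&& 0x1F80 = 0x1F80 := (show abiInv _ from hfr.inv).2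
  have hsse := Vorbis.sseOK_of_abiInv hfr.inv
  have hfN : (UInt64.ofNat g.f).toNat = g.f := by u_omega
  have hbits0 := hcar.sdw.bits
  u_walk hcode [hμ.vendor] until [Vorbis.L.start_decoder.cut86] span [Vorbis.L.textLo, Vorbis.L.textHi] side (v_side)
  · v_inv
  · -- the precondition of get_bits(f, 8) at 0x11433c
    have hun : ShadowUntouched v.mem s_11433c.mem := by v_untouched
    have hrdi : (s_11433c.reg .rdi).toNat = g.f := by
      rw [w_rdi]
      exact hfN
    refine ⟨⟨shadowPre_call hfr ?_ hun, ?_, ?_⟩, ?_⟩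
    · rw [w_rsp]
      unfold Ghost.R Ghost.RA steady
      u_omega
    · rw [hrdi]
      exact readerEnv hh hcar.sdw.env.live
    · rw [hrdi, w_mem]
      exact (Reader.store_off_obj hbits0 _ 8 _ (by u_omega) (by u_omega)).1.bits
    · rw [bitsArg_def, w_rsi]
      decide
  · -- 0x114341 (`cut86`), after get_bits(f, 8) returned
    have hrdi : (s_11433c.reg .rdi).toNat = g.f := by
      rw [w_rdi_11433c]
      exact hfN
    have harg : bitsArg s_11433c = 8 := by
      rw [bitsArg_def, w_rsi_11433c]
      decide
    have hpost : GetBitsSpecPost (g.Blk A) g.len g.f 8 s_11433c s_11433cr := by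
      have := w_post
      simp only [get_bits.spec] at this
      rw [hrdi, harg] at this
      exact this
    v_after_call w_rsp_11433c w_mem_11433c
    simp only [w_rdi_11433c, hfN] at w_same
    have hs : Mem.SameExcept [⟨(g.e.reg .rsp).toNat - 1888, (g.e.reg .rsp).toNat - 1480⟩,
        ⟨g.f + 48, g.f + 56⟩, ⟨g.f + 84, g.f + 96⟩, ⟨g.f + 136, g.f + 144⟩, ⟨g.f + 1484, g.f + 1749⟩,
        ⟨g.f + 1752, g.f + 1784⟩] v.mem s_11433cr.mem := by
      u_same
    have hrsp : s_11433cr.reg .rsp = addr g.R := by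
      rw [w_rsp, ← hv_rsp, hfr.rsp]
    have hinv : abiInv s_11433cr := w_inv
    obtain ⟨hfr', hcar', hobj', _⟩ := stepC (pc' := Vorbis.L.start_decoder.cut86) hfr hh hcar hs (by
      intro s hsm
      simp only [List.mem_cons, List.mem_nil_iff, or_false] at hsm
      unfold OKSpan Ghost.R Ghost.RA steady depth
      rcases hsm with rfl | rfl | rfl | rfl | rfl | rfl <;> simp only [] <;> omega) w_rip hrsp w_eq hinv hpost.bits.bits
    have ecnt : stb_vorbis.codebook_count s_11433cr.mem g.f = stb_vorbis.codebook_count v.mem g.f := by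
      simp only [vacc, voff]
      exact hobj'.i32 160 (by decide)
    have ecbs : stb_vorbis.codebooks s_11433cr.mem g.f = stb_vorbis.codebooks v.mem g.f := by
      simp only [vacc, voff]
      exact hobj'.u64 168 (by decide)
    refine ReachVia.done ⟨⟨hfr', hh, hcar', hin.noTemps, by rw [ecnt]; exact hin.lt, ?_, ?_⟩, by rw [w_kept .r15 rfl]; exact hin.r15⟩
    · rw [w_kept .r14 rfl, hin.r14]
      unfold Ghost.cb stb_vorbis.codebooks_at
      rw [ecbs]
    · have := hpost.bits.result.2 (by omega)
      omega

/-- **What segment C2 carries once it has stored into the struct `cb(i)`** (from 0x114351 `c->dimensions = …` on): as `Carry`, but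
ZF(i + 1) only, and of the book under construction the bytes the segment never stores — `[c + 8, c + 27)` (`codeword_lengths`,
`minimum_value` … `sequence_p`: the first is stored by the dense allocation, last) and `[c + 28, c + 2120)` — are still zero
(`Fresh7`, `LengthsAt.sparse_null`). -/
structure Carry2 (g : Ghost) (i : Nat) (A2 A3 : Arena) (A : Arena × List Obj) (mem : Mem) : Prop where
  sdw : SDw g.len 3 A (g.Blk A) (g.Live A) mem g.f g.R
  ages : BookTrans A2 A3 A.1 A.1 mem g.f i
  zf : ZF mem (stb_vorbis.codebooks mem g.f) (stb_vorbis.codebook_count mem g.f).toNat (i + 1)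
  slot_f : mem.u64 (g.R + 0x18) = g.f
  slot_i : mem.u32 (g.R + 0x30) = i
  fresh_lo : ZeroFill mem (g.cb mem i + 8) 19
  fresh_hi : ZeroFill mem (g.cb mem i + 28) 2092

/-- The carried clauses at the first store into `cb(i)`: ZF(i) gives ZF(i + 1) and the zero bytes of `cb(i)`. -/
theorem Carry.toCarry2 {g : Ghost} {i : Nat} {A2 A3 : Arena} {A : Arena × List Obj} {mem : Mem}
    (h : Carry g i A2 A3 A mem) (hlt : (i : Int) < stb_vorbis.codebook_count mem g.f) : Carry2 g i A2 A3 A mem := by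
  have hb := h.zf.book i (Nat.le_refl i) (by omega)
  refine ⟨h.sdw, h.ages, ZF.next h.zf, h.slot_f, h.slot_i, ?_, ?_⟩
  · unfold Ghost.cb stb_vorbis.codebooks_at
    intro j hj
    have := hb (8 + j) (by simp only [voff]; omega)
    rw [← Nat.add_assoc] at this
    exact this
  · unfold Ghost.cb stb_vorbis.codebooks_at
    intro j hj
    have := hb (28 + j) (by simp only [voff]; omega)
    rw [← Nat.add_assoc] at this
    exact this

/-- A window of a footprint that the carried clauses tolerate once the struct `cb(i)` (at `c`) is being filled: an `OKSpan`, or inside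
the fields the segment stores — `dimensions`, `entries` (`[c, c + 8)`), `sparse` (`[c + 27, c + 28)`). -/
def OKSpan2 (g : Ghost) (c : Nat) (s : Span) : Prop :=
  OKSpan g s ∨ (c ≤ s.lo ∧ s.hi ≤ c + 8) ∨ (c + 27 ≤ s.lo ∧ s.hi ≤ c + 28)

/-- **ONE STEP OF SEGMENT C2 AFTER THE FIRST STORE INTO `cb(i)`** (as `stepC`, the footprint may also contain stores to the fields
`dimensions`, `entries`, `sparse` of the book under construction): `Frame`, the carried clauses `Carry2` (the record by
`BookTrans.frame`, block by block: the comment blocks are older than the codebooks block, the finished structs are other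
elements of it, their `sorted_values` blocks are younger), and the bytes `[c + 8, c + 27)` read the same. -/
theorem step2 {u₀ : State} {g : Ghost} {pc pc' : Word} {i : Nat} {A2 A3 : Arena} {A : Arena × List Obj} {v w : State}
    (hfr : Frame u₀ g pc A v) (hh : g.Hand A) (hc : Carry2 g i A2 A3 A v.mem)
    (hlt : (i : Int) < stb_vorbis.codebook_count v.mem g.f) {ws : List Span}
    (hs : Mem.SameExcept ws v.mem w.mem) (hws : ∀ s, s ∈ ws → OKSpan2 g (g.cb v.mem i) s)
    (hrip : w.rip = pc') (hrsp : w.reg .rsp = addr g.R) (hcode : CodeOK u₀ w.mem) (hinv : abiInv w)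
    (hbits : Bits (g.Blk A) g.len w.mem g.f) :
    Frame u₀ g pc' A w ∧ Carry2 g i A2 A3 A w.mem ∧ ObjEq carryWins v.mem g.f w.mem g.f ∧
      Mem.EqOn (g.cb v.mem i + 8) (g.cb v.mem i + 27) v.mem w.mem := by
  -- the struct `cb(i)`: inside the codebooks block, a block of the arena
  have hcbok := hc.ages.cbOK
  have hF1 := hc.ages.F1
  have hci := hcbok.cb_in i hlt
  have hcbin := arena_inside hc.sdw.arena hcbok.F2
  have hcboff := hc.sdw.arena.blk_off_stack hcbok.F2
  have hlogout := hh.outside ⟨0x120640, 16⟩ (by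
    simp only [fixedBlocks, globalBlocks, List.mem_cons, true_or, or_true])
  obtain ⟨c, hcdef⟩ : ∃ c, g.cb v.mem i = c := ⟨_, rfl⟩
  rw [hcdef] at hws ⊢
  unfold Ghost.cb at hcdef
  rw [hcdef] at hci
  simp only [vblock, voff] at hci hcbin hcboff hlogout
  obtain ⟨hw1, hw2, hw3⟩ := f_where hfr hh
  obtain ⟨hr1, hr2⟩ := hfr.r_eq
  obtain ⟨ha1, ha2, ha3⟩ := hfr.ra
  simp only [depth, steady] at hr1 ha2
  have harena := hc.sdw.arena
  have hAR1 := harena.AR1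
  have hout := hh.objOut
  simp only [voff] at hout
  -- every window, as arithmetic: off the shadow, off the frame slots, off the arena, off the windows of `*f` that are read
  have hspan : ∀ s, s ∈ ws → s.hi ≤ 0xC00000 ∧
      ((g.RA - 1888 ≤ s.lo ∧ s.hi ≤ g.R) ∨
        (g.f + 48 ≤ s.lo ∧ s.hi ≤ g.f + 56) ∨ (g.f + 84 ≤ s.lo ∧ s.hi ≤ g.f + 96) ∨ (g.f + 136 ≤ s.lo ∧ s.hi ≤ g.f + 144) ∨
        (g.f + 1484 ≤ s.lo ∧ s.hi ≤ g.f + 1749) ∨ (g.f + 1752 ≤ s.lo ∧ s.hi ≤ g.f + 1784) ∨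
        (c ≤ s.lo ∧ s.hi ≤ c + 8) ∨ (c + 27 ≤ s.lo ∧ s.hi ≤ c + 28)) := by
    intro s hsm
    have := hws s hsm
    unfold OKSpan2 OKSpan at this
    simp only [depth] at this
    refine ⟨?_, ?_⟩
    · omega
    · omega
  have hun : Mem.EqOn 0xC00000 0xE00000 v.mem w.mem := by
    apply hs.eqOn
    intro s hsm
    have := (hspan s hsm).1
    omega
  have hslots : Mem.EqOn (g.R + 8) (g.R + 0x38) v.mem w.mem := by
    apply hs.eqOn
    intro s hsm
    have := (hspan s hsm).2
    omega
  have hsaved : Mem.EqOn (g.R + 0x598) (g.R + 0x5d0) v.mem w.mem := by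
    apply hs.eqOn
    intro s hsm
    have := (hspan s hsm).2
    omega
  have hflds : Mem.EqOn (g.f + 112) (g.f + 136) v.mem w.mem := by
    apply hs.eqOn
    intro s hsm
    have := (hspan s hsm).2
    omega
  have hlog : Mem.EqOn 0x120640 0x120650 v.mem w.mem := by
    have hblk : g.Blk A (objBlock g.f) := runBlk_extra List.mem_cons_self
    have hblk2 : g.Blk A ⟨0x120640, 16⟩ := by
      apply runBlk_extra
      simp only [fixedBlocks, globalBlocks, List.mem_cons, true_or, or_true]
    have hd := hc.sdw.env.ok.disjoint hblk hblk2 (by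
      intro e
      have := congrArg Block.size e
      simp only [vblock, voff] at this
      omega)
    simp only [vblock, voff] at hd
    apply hs.eqOn
    intro s hsm
    have := (hspan s hsm).2
    omega
  have hobj : ObjEq carryWins v.mem g.f w.mem g.f := by
    apply ObjEq.of_sameExcept hs
    · intro win hwin
      simp only [carryWins, List.mem_cons, List.mem_nil_iff, or_false] at hwin
      rcases hwin with rfl | rfl | rfl | rfl | rfl <;> simp only [] <;> omega
    · intro win hwin s hsm
      have := (hspan s hsm).2
      simp only [carryWins, List.mem_cons, List.mem_nil_iff, or_false] at hwin
      rcases hwin with rfl | rfl | rfl | rfl | rfl <;> simp only [] <;> omega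
  -- every block of the arena that does not meet `cb(i)` is kept
  have hkeptB : ∀ B, A.1.Blk B → (B.base + B.size ≤ c ∨ c + 28 ≤ B.base) → B.Kept v.mem w.mem := by
    intro B hB hdis
    apply Block.Kept.of_sameExcept hs
    · intro s hsm
      have := (hspan s hsm).2
      have hin := arena_inside harena hB
      have hoff := harena.blk_off_stack hB
      omega
    · exact harena.blkOK.no_wrap hB
  have harena' : ArenaOK A.1 A.2 w.mem g.f := by
    apply harena.frame (by simp only [voff]; omega)
    simp only [voff]
    exact hflds
  have hR64 : g.R + 0x5d0 ≤ 2 ^ 64 := by omega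
  have h3 : A3.Extends A.1 := hc.ages.ext3
  have h2 : A2.Extends A.1 := hc.ages.ext2.trans h3
  have ecnt : stb_vorbis.codebook_count w.mem g.f = stb_vorbis.codebook_count v.mem g.f := by
    simp only [vacc, voff]
    exact hobj.i32 160 (by decide)
  have ecbs : stb_vorbis.codebooks w.mem g.f = stb_vorbis.codebooks v.mem g.f := by
    simp only [vacc, voff]
    exact hobj.u64 168 (by decide)
  have hages : BookTrans A2 A3 A.1 A.1 w.mem g.f i := by
    apply hc.ages.frame (hobj.sub (by decide))
    · -- the comment blocks: blocks of `A2`, the codebooks block was allocated since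
      intro B hR
      have hB : A2.Blk B := hc.ages.comment.reads_blk hR
      have hd := harena.old_disjoint_since h2 hB (hc.ages.F2.mono h3)
      simp only [vblock, voff] at hd
      exact hkeptB B (hB.mono h2) (by omega)
    · -- the structs of the finished books
      intro j hj
      have hlj : (j : Int) < stb_vorbis.codebook_count v.mem g.f := by omega
      have hcj := hcbok.cb_in j hlj
      have hd := CodebooksOK.cb_disjoint v.mem g.f j i (by omega)
      rw [hcdef] at hd
      simp only [vblock, voff] at hcj hd
      apply Block.Kept.of_sameExcept hs
      · intro s hsm
        have := (hspan s hsm).2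
        simp only [vblock, voff]
        omega
      · simp only [vblock, voff]
        omega
    · -- the `sorted_values` blocks of the finished books: allocated since `A3`, the codebooks block is a block of `A3`
      intro j hj hse
      have hS : Since A3 A.1 (Codebook.svBlock v.mem (stb_vorbis.codebooks_at v.mem g.f j)) :=
        (hc.ages.books j hj).K4.sv hse
      generalize Codebook.svBlock v.mem (stb_vorbis.codebooks_at v.mem g.f j) = SB at hS ⊢
      have hd := harena.old_disjoint_since h3 hc.ages.F2.1 hS
      simp only [vblock, voff] at hd
      exact hkeptB SB hS.1 (by omega)
  have hzf : ZF w.mem (stb_vorbis.codebooks w.mem g.f) (stb_vorbis.codebook_count w.mem g.f).toNat (i + 1) := by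
    rw [ecnt, ecbs]
    apply hc.zf.same
    · apply hs.eqOn
      intro s hsm
      have := (hspan s hsm).2
      simp only [stb_vorbis.codebooks_at, voff] at hcdef
      simp only [voff]
      omega
    · omega
    · simp only [voff]
      omega
  have ecb : g.cb w.mem i = c := by
    unfold Ghost.cb stb_vorbis.codebooks_at
    rw [ecbs]
    exact hcdef
  have hlo : Mem.EqOn (c + 8) (c + 27) v.mem w.mem := by
    apply hs.eqOn
    intro s hsm
    have := (hspan s hsm).2
    omega
  have hhi : Mem.EqOn (c + 28) (c + 28 + 2092) v.mem w.mem := by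
    apply hs.eqOn
    intro s hsm
    have := (hspan s hsm).2
    omega
  have hcar' : Carry2 g i A2 A3 A w.mem := by
    refine ⟨sdw_frame hc.sdw (hobj.sub (by decide)) (hslots.mono (Nat.le_refl _) (by omega)) (by omega) hun harena' hbits,
      hages, hzf, ?_, ?_, ?_, ?_⟩
    · rw [hslots.u64 (g.R + 0x18) (by omega) (by omega) (by omega)]
      exact hc.slot_f
    · rw [hslots.u32 (g.R + 0x30) (by omega) (by omega) (by omega)]
      exact hc.slot_i
    · rw [ecb]
      have := hc.fresh_lo
      unfold Ghost.cb at this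
      rw [hcdef] at this
      exact this.same hlo (by omega)
    · rw [ecb]
      have := hc.fresh_hi
      unfold Ghost.cb at this
      rw [hcdef] at this
      exact this.same hhi (by omega)
  refine ⟨?_, hcar', hobj, hlo⟩
  exact
    { entry := hfr.entry
      rip := hrip
      rsp := hrsp
      shadowIdx := by
        rw [hslots.u64 (g.R + 8) (by omega) (by omega) (by omega)]
        exact hfr.shadowIdx
      saved_rbx := by
        rw [hsaved.u64 (g.R + 0x598) (by omega) (by omega) hR64]
        exact hfr.saved_rbx
      saved_rbp := by
        rw [hsaved.u64 (g.R + 0x5a0) (by omega) (by omega) hR64]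
        exact hfr.saved_rbp
      saved_r12 := by
        rw [hsaved.u64 (g.R + 0x5a8) (by omega) (by omega) hR64]
        exact hfr.saved_r12
      saved_r13 := by
        rw [hsaved.u64 (g.R + 0x5b0) (by omega) (by omega) hR64]
        exact hfr.saved_r13
      saved_r14 := by
        rw [hsaved.u64 (g.R + 0x5b8) (by omega) (by omega) hR64]
        exact hfr.saved_r14
      saved_r15 := by
        rw [hsaved.u64 (g.R + 0x5c0) (by omega) (by omega) hR64]
        exact hfr.saved_r15
      saved_ra := by
        rw [hsaved.u64 (g.R + 0x5c8) (by omega) (by omega) hR64]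
        exact hfr.saved_ra
      code := hcode
      inv := hinv
      shadow := hfr.shadow.untouched hun
      offText := hfr.offText
      ext := hfr.ext
      callers := hfr.callers
      sh7 := log2_frame hfr.sh7 hlog
      same := by
        apply hfr.same.step_same hs
        intro s hsm a h1 h2
        have := (hspan s hsm).2
        unfold footprint writes
        have hB0 := hfr.ext.B
        have hL0 := hfr.ext.L
        by_cases hbook : c ≤ s.lo ∧ s.hi ≤ c + 28
        · refine ⟨⟨g.A0.1.B, g.A0.1.B + g.A0.1.L⟩,
            List.mem_cons_of_mem _ (List.mem_cons_of_mem _ (List.mem_cons_of_mem _ List.mem_cons_self)), ?_, ?_⟩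
          · simp only []
            omega
          · simp only []
            omega
        by_cases hst : g.RA - 1888 ≤ s.lo ∧ s.hi ≤ g.R
        · refine ⟨⟨g.RA - depth, g.RA⟩, List.mem_cons_self, ?_, ?_⟩
          · simp only [depth]
            omega
          · simp only []
            omega
        · refine ⟨(objBlock (g.e.reg .rdi).toNat).span, List.mem_cons_of_mem _ List.mem_cons_self, ?_, ?_⟩
          · have e : (g.e.reg .rdi).toNat = g.f := rfl
            simp only [vblock, voff, e]
            omega
          · have e : (g.e.reg .rdi).toNat = g.f := rfl
            simp only [vblock, voff, e]
            omega }

/-- `c->dimensions = (get_bits(f, 8) << 8) + (uint8) x` is at most 65535 (the walker's form of `shl eax, 8 ; movzx ebx, bl ;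
add ebx, eax` with `eax < 256`). -/
theorem dim_bound (x : BitVec 8) (y : BitVec 32) (h : y < 256#32) : BitVec.zeroExtend 32 x + y <<< 8 ≤ 65535#32 := by
  bv_decide

/-- `In15` once the struct `cb(i)` is being filled (from `cut87` on): the carried clauses are `Carry2`; `dimensions` is stored
(two zero-extended bytes: `0 ≤ D ≤ 65535`). -/
structure In2 (u₀ : State) (g : Ghost) (i : Nat) (A2 A3 : Arena) (A : Arena × List Obj) (pc : Word) (bound : Nat) (v : State) :
    Prop where
  frame : Frame u₀ g pc A v
  hand : g.Hand A
  carry : Carry2 g i A2 A3 A v.mem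
  noTemps : A.1.temps = []
  lt : (i : Int) < stb_vorbis.codebook_count v.mem g.f
  r14 : v.reg .r14 = addr (g.cb v.mem i)
  r15 : v.reg .r15 = addr g.f
  rax : (v.reg .rax).toNat < bound
  dim_nonneg : 0 ≤ Codebook.dimensions v.mem (g.cb v.mem i)
  dim_le : Codebook.dimensions v.mem (g.cb v.mem i) ≤ 65535

/-- **Line 3757, second half, and line 3758** (`cut86` 0x114341: `shl eax, 8 ; movzx ebx, bl ; add ebx, eax` ; check store4 `c` ;
`c->dimensions = ebx` ; `get_bits(f, 8)` → `cut87` 0x114361). -/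
theorem dims2 {Lay : Layout} (hLay : Lay.hi = 0x1000000) {μ : Microarch} (hμ : UserX.MicroOK μ) {u₀ : State}
    (hcode : HasCodeNat Lay u₀ Vorbis.L.start_decoder.entry Vorbis.Code.code_start_decoder.nat Vorbis.L.start_decoder.size)
    (hst4 : Asan.SmallCheck Lay μ Vorbis.WayInv (Vorbis.CodeOK u₀) [.rax, .rcx, .rdx] 4 Vorbis.L.__asan_store4_noabort.entry)
    (h_get_bits : ∀ (others : List Obj) (frames : List (Nat × FrameLayout)) (Blk : Block → Prop) (len : Nat),
      Calls Lay μ Vorbis.WayInv (Vorbis.conv u₀) Vorbis.L.get_bits.entry (Vorbis.Spec.get_bits.spec others frames Blk len))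
    (g : Ghost) (i : Nat) (v : State) (A2 A3 : Arena) (A : Arena × List Obj)
    (hin : In15 u₀ g i A2 A3 A Vorbis.L.start_decoder.cut86 256 v) :
    ReachVia Lay μ WayInv v (fun w => In2 u₀ g i A2 A3 A Vorbis.L.start_decoder.cut87 256 w) := by
  have hfr := hin.frame
  have hcar := hin.carry
  have hh := hin.hand
  have he := hfr.entry
  v_entry he
  simp only [depth] at he_room he_stack
  have hgb := h_get_bits A.2 g.frames' (g.Blk A) g.len
  have hwhere := f_where hfr hh
  have hRA : g.RA = (g.e.reg .rsp).toNat := rfl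
  rw [hRA] at hwhere
  have w_rip : v.rip = Vorbis.L.start_decoder.cut86 := hfr.rip
  have hv_rsp : v.reg .rsp = g.e.reg .rsp - 1480 := by
    rw [hfr.rsp]
    unfold Ghost.R Ghost.RA steady
    have := slot_word (g.e.reg .rsp) 0 (by omega) (by omega)
    simpa using this
  have hv_r15 : v.reg .r15 = UInt64.ofNat g.f := hin.r15
  obtain ⟨c, hcdef⟩ : ∃ c, g.cb v.mem i = c := ⟨_, rfl⟩
  have hv_r14 : v.reg .r14 = UInt64.ofNat c := by
    rw [hin.r14, hcdef]
    rfl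
  have w_eq : Mem.EqOn Vorbis.L.textLo Vorbis.L.textHi u₀.mem v.mem := hfr.code
  have hdf : v.flags .df = false := (show abiInv _ from hfr.inv).1
  have hmx : v.mxcsr &&& 0x1F80 = 0x1F80 := (show abiInv _ from hfr.inv).2
  have hsse := Vorbis.sseOK_of_abiInv hfr.inv
  have hfN : (UInt64.ofNat g.f).toNat = g.f := by u_omega
  have hbits0 := hcar.sdw.bits
  -- where the struct is: inside the codebooks block, a live block of the arena, above the text, off the stack, off `*f`
  have hcbok := hcar.ages.cbOK
  have hci := hcbok.cb_in i hin.lt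
  have hcbin := arena_inside hcar.sdw.arena hcbok.F2
  have hcboff := hcar.sdw.arena.blk_off_stack hcbok.F2
  have hAR1 := hcar.sdw.arena.AR1
  have htext := hh.arenaText
  have hout := hh.objOut
  unfold Ghost.cb at hcdef
  rw [hcdef] at hci
  simp only [vblock, voff] at hci hcbin hcboff hout
  have htx : Vorbis.L.textHi = 0x119d40 := rfl
  rw [htx] at htext
  have hcw : 0x119d40 ≤ c ∧ c + 2120 ≤ 0xC00000 ∧ (c + 2120 ≤ 0x700000 ∨ 0x800000 ≤ c) ∧
      (g.f + 1808 ≤ c ∨ c + 2120 ≤ g.f) := by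
    omega
  have hcN : (UInt64.ofNat c).toNat = c := by u_omega
  have hlive : LiveBytes A.2 g.frames' c 2120 := by
    have hbl := hcar.sdw.env.live _ (up g A _ hcbok.F2)
    exact LiveBytes.of_block hbl (by simp only []; omega) (by simp only [voff]; omega)
  u_walk hcode [hμ.vendor] until [Vorbis.L.start_decoder.cut87] span [Vorbis.L.textLo, Vorbis.L.textHi] side (v_side)
  · -- 0x11434c check store4 c (line 3757 `c->dimensions`): inside the codebooks block
    have hun : ShadowUntouched v.mem s_11434c.mem := by v_untouched
    exact hlive.accSmall hfr.shadow hun _ 4 (by decide) (by u_omega) (by u_omega)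
  · v_inv
  · -- the precondition of get_bits(f, 8) at 0x11435c
    have hun : ShadowUntouched v.mem s_11435c.mem := by v_untouched
    have hrdi : (s_11435c.reg .rdi).toNat = g.f := by
      rw [w_rdi]
      exact hfN
    refine ⟨⟨shadowPre_call hfr ?_ hun, ?_, ?_⟩, ?_⟩
    · rw [w_rsp]
      unfold Ghost.R Ghost.RA steady
      u_omega
    · rw [hrdi]
      exact readerEnv hh hcar.sdw.env.live
    · rw [hrdi, w_mem]
      generalize (BitVec.zeroExtend 32 (Word.part Width.w8 (v.reg Reg.rbx)) +
        Word.part Width.w32 (v.reg Reg.rax) <<< 8).toNat = xv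
      have b1 := (Reader.store_off_obj hbits0 (g.e.reg .rsp - 1488) 8 1131345 (by u_omega) (by u_omega)).1.bits
      have b2 := (Reader.store_off_obj b1 (UInt64.ofNat c) 4 xv (by u_omega) (by u_omega)).1.bits
      exact (Reader.store_off_obj b2 (g.e.reg .rsp - 1488) 8 1131361 (by u_omega) (by u_omega)).1.bits
    · rw [bitsArg_def, w_rsi]
      decide
  · -- 0x114361 (`cut87`), after get_bits(f, 8) returned
    have hrdi : (s_11435c.reg .rdi).toNat = g.f := by
      rw [w_rdi_11435c]
      exact hfN
    have harg : bitsArg s_11435c = 8 := by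
      rw [bitsArg_def, w_rsi_11435c]
      decide
    have hpost : GetBitsSpecPost (g.Blk A) g.len g.f 8 s_11435c s_11435cr := by
      have := w_post
      simp only [get_bits.spec] at this
      rw [hrdi, harg] at this
      exact this
    -- the stored `dimensions`, before and after the call
    obtain ⟨D, hDdef⟩ : ∃ D : BitVec 32, BitVec.zeroExtend 32 (Word.part Width.w8 (v.reg Reg.rbx)) +
        Word.part Width.w32 (v.reg Reg.rax) <<< 8 = D := ⟨_, rfl⟩
    have hDle : D.toNat ≤ 65535 := by
      have hy : Word.part Width.w32 (v.reg Reg.rax) < 256#32 := by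
        rw [BitVec.lt_def, Vorbis.toNat_part32]
        have := hin.rax
        show (v.reg Reg.rax).toNat % 2 ^ 32 < 256
        omega
      have := dim_bound (Word.part Width.w8 (v.reg Reg.rbx)) _ hy
      rw [hDdef, BitVec.le_def] at this
      exact this
    rw [hDdef] at w_mem_11435c
    v_after_call w_rsp_11435c w_mem_11435c
    have hD0 : (((v.mem.writeLE (g.e.reg .rsp - 1488) 8 1131345).writeLE (UInt64.ofNat c) 4 D.toNat).writeLE
        (g.e.reg .rsp - 1488) 8 1131361).readLE (UInt64.ofNat c) 4 = D.toNat := by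
      u_read
    simp only [w_rdi_11435c, hfN] at w_same
    have hD1 : s_11435cr.mem.readLE (UInt64.ofNat c) 4 = D.toNat := by
      u_frame hD0
    have hs : Mem.SameExcept [⟨(g.e.reg .rsp).toNat - 1888, (g.e.reg .rsp).toNat - 1480⟩,
        ⟨g.f + 48, g.f + 56⟩, ⟨g.f + 84, g.f + 96⟩, ⟨g.f + 136, g.f + 144⟩, ⟨g.f + 1484, g.f + 1749⟩,
        ⟨g.f + 1752, g.f + 1784⟩, ⟨c, c + 4⟩] v.mem s_11435cr.mem := by
      u_same
    have hrsp : s_11435cr.reg .rsp = addr g.R := by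
      rw [w_rsp, ← hv_rsp, hfr.rsp]
    have hinv : abiInv s_11435cr := w_inv
    have hcb0 : g.cb v.mem i = c := hcdef
    obtain ⟨hfr', hcar', hobj', _⟩ := step2 (pc' := Vorbis.L.start_decoder.cut87) hfr hh (hcar.toCarry2 hin.lt) hin.lt hs (by
      intro s hsm
      rw [hcb0]
      simp only [List.mem_cons, List.mem_nil_iff, or_false] at hsm
      unfold OKSpan2 OKSpan Ghost.R Ghost.RA steady depth
      rcases hsm with rfl | rfl | rfl | rfl | rfl | rfl | rfl <;> simp only [] <;> omega) w_rip hrsp w_eq hinv hpost.bits.bits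
    have ecnt : stb_vorbis.codebook_count s_11435cr.mem g.f = stb_vorbis.codebook_count v.mem g.f := by
      simp only [vacc, voff]
      exact hobj'.i32 160 (by decide)
    have ecbs : stb_vorbis.codebooks s_11435cr.mem g.f = stb_vorbis.codebooks v.mem g.f := by
      simp only [vacc, voff]
      exact hobj'.u64 168 (by decide)
    have ecb : g.cb s_11435cr.mem i = c := by
      unfold Ghost.cb stb_vorbis.codebooks_at
      rw [ecbs]
      exact hcdef
    have hdim : Codebook.dimensions s_11435cr.mem c = (D.toNat : Int) := by
      simp only [vacc, voff]
      unfold Mem.i32 Mem.u32 addr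
      rw [Nat.add_zero, hD1]
      unfold sint32
      rw [if_pos (by omega)]
    refine ReachVia.done ⟨hfr', hh, hcar', hin.noTemps, by rw [ecnt]; exact hin.lt, ?_, ?_, ?_, ?_, ?_⟩
    · rw [w_kept .r14 rfl, hin.r14, ecb]
      unfold Ghost.cb
      rw [hcdef]
    · rw [w_kept .r15 rfl]
      exact hin.r15
    · have := hpost.bits.result.2 (by omega)
      omega
    · rw [ecb, hdim]
      omega
    · rw [ecb, hdim]
      omega

/-- **Line 3759** (`cut87` 0x114361: `mov ebp, eax` (x) ; `get_bits(f, 8)` → `cut88` 0x114370). Only the low byte of `ebp` is used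
later (`movzx ebx, bpl`): its value is not recorded. -/
theorem ent1 {Lay : Layout} (hLay : Lay.hi = 0x1000000) {μ : Microarch} (hμ : UserX.MicroOK μ) {u₀ : State}
    (hcode : HasCodeNat Lay u₀ Vorbis.L.start_decoder.entry Vorbis.Code.code_start_decoder.nat Vorbis.L.start_decoder.size)
    (h_get_bits : ∀ (others : List Obj) (frames : List (Nat × FrameLayout)) (Blk : Block → Prop) (len : Nat),
      Calls Lay μ Vorbis.WayInv (Vorbis.conv u₀) Vorbis.L.get_bits.entry (Vorbis.Spec.get_bits.spec others frames Blk len))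
    (g : Ghost) (i : Nat) (v : State) (A2 A3 : Arena) (A : Arena × List Obj) (b : Nat)
    (hin : In2 u₀ g i A2 A3 A Vorbis.L.start_decoder.cut87 b v) :
    ReachVia Lay μ WayInv v (fun w => In2 u₀ g i A2 A3 A Vorbis.L.start_decoder.cut88 256 w) := by
  have hfr := hin.frame
  have hcar := hin.carry
  have hh := hin.hand
  have he := hfr.entry
  v_entry he
  simp only [depth] at he_room he_stack
  have hgb := h_get_bits A.2 g.frames' (g.Blk A) g.len
  have hwhere := f_where hfr hh
  have hRA : g.RA = (g.e.reg .rsp).toNat := rfl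
  rw [hRA] at hwhere
  have w_rip : v.rip = Vorbis.L.start_decoder.cut87 := hfr.rip
  have hv_rsp : v.reg .rsp = g.e.reg .rsp - 1480 := by
    rw [hfr.rsp]
    unfold Ghost.R Ghost.RA steady
    have := slot_word (g.e.reg .rsp) 0 (by omega) (by omega)
    simpa using this
  have hv_r15 : v.reg .r15 = UInt64.ofNat g.f := hin.r15
  obtain ⟨c, hcdef⟩ : ∃ c, g.cb v.mem i = c := ⟨_, rfl⟩
  have w_eq : Mem.EqOn Vorbis.L.textLo Vorbis.L.textHi u₀.mem v.mem := hfr.code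
  have hdf : v.flags .df = false := (show abiInv _ from hfr.inv).1
  have hmx : v.mxcsr &&& 0x1F80 = 0x1F80 := (show abiInv _ from hfr.inv).2
  have hsse := Vorbis.sseOK_of_abiInv hfr.inv
  have hfN : (UInt64.ofNat g.f).toNat = g.f := by u_omega
  have hbits0 := hcar.sdw.bits
  have hcbok := hcar.ages.cbOK
  have hci := hcbok.cb_in i hin.lt
  have hcbin := arena_inside hcar.sdw.arena hcbok.F2
  have hcboff := hcar.sdw.arena.blk_off_stack hcbok.F2
  have hAR1 := hcar.sdw.arena.AR1
  have hout := hh.objOut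
  have hcb0 : g.cb v.mem i = c := hcdef
  unfold Ghost.cb at hcdef
  rw [hcdef] at hci
  simp only [vblock, voff] at hci hcbin hcboff hout
  have hcw : c + 2120 ≤ 0xC00000 ∧ (c + 2120 ≤ 0x700000 ∨ 0x800000 ≤ c) ∧ (g.f + 1808 ≤ c ∨ c + 2120 ≤ g.f) := by
    omega
  clear hci hcbin hcboff hAR1 hout
  u_walk hcode [hμ.vendor] until [Vorbis.L.start_decoder.cut88] span [Vorbis.L.textLo, Vorbis.L.textHi] side (v_side)
  · v_inv
  · -- the precondition of get_bits(f, 8) at 0x11436b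
    have hun : ShadowUntouched v.mem s_11436b.mem := by v_untouched
    have hrdi : (s_11436b.reg .rdi).toNat = g.f := by
      rw [w_rdi]
      exact hfN
    refine ⟨⟨shadowPre_call hfr ?_ hun, ?_, ?_⟩, ?_⟩
    · rw [w_rsp]
      unfold Ghost.R Ghost.RA steady
      u_omega
    · rw [hrdi]
      exact readerEnv hh hcar.sdw.env.live
    · rw [hrdi, w_mem]
      exact (Reader.store_off_obj hbits0 _ 8 _ (by u_omega) (by u_omega)).1.bits
    · rw [bitsArg_def, w_rsi]
      decide
  · -- 0x114370 (`cut88`), after get_bits(f, 8) returned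
    have hrdi : (s_11436b.reg .rdi).toNat = g.f := by
      rw [w_rdi_11436b]
      exact hfN
    have harg : bitsArg s_11436b = 8 := by
      rw [bitsArg_def, w_rsi_11436b]
      decide
    have hpost : GetBitsSpecPost (g.Blk A) g.len g.f 8 s_11436b s_11436br := by
      have := w_post
      simp only [get_bits.spec] at this
      rw [hrdi, harg] at this
      exact this
    v_after_call w_rsp_11436b w_mem_11436b
    simp only [w_rdi_11436b, hfN] at w_same
    have hs : Mem.SameExcept [⟨(g.e.reg .rsp).toNat - 1888, (g.e.reg .rsp).toNat - 1480⟩,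
        ⟨g.f + 48, g.f + 56⟩, ⟨g.f + 84, g.f + 96⟩, ⟨g.f + 136, g.f + 144⟩, ⟨g.f + 1484, g.f + 1749⟩,
        ⟨g.f + 1752, g.f + 1784⟩] v.mem s_11436br.mem := by
      u_same
    have hrsp : s_11436br.reg .rsp = addr g.R := by
      rw [w_rsp, ← hv_rsp, hfr.rsp]
    have hinv : abiInv s_11436br := w_inv
    obtain ⟨hfr', hcar', hobj', _⟩ := step2 (pc' := Vorbis.L.start_decoder.cut88) hfr hh hcar hin.lt hs (by
      intro s hsm
      rw [hcb0]
      simp only [List.mem_cons, List.mem_nil_iff, or_false] at hsm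
      unfold OKSpan2 OKSpan Ghost.R Ghost.RA steady depth
      rcases hsm with rfl | rfl | rfl | rfl | rfl | rfl <;> simp only [] <;> omega) w_rip hrsp w_eq hinv hpost.bits.bits
    have ecnt : stb_vorbis.codebook_count s_11436br.mem g.f = stb_vorbis.codebook_count v.mem g.f := by
      simp only [vacc, voff]
      exact hobj'.i32 160 (by decide)
    have ecbs : stb_vorbis.codebooks s_11436br.mem g.f = stb_vorbis.codebooks v.mem g.f := by
      simp only [vacc, voff]
      exact hobj'.u64 168 (by decide)
    have ecb : g.cb s_11436br.mem i = c := by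
      unfold Ghost.cb stb_vorbis.codebooks_at
      rw [ecbs]
      exact hcdef
    -- the fields of `cb(i)` stored so far read the same
    have hbook : Mem.EqOn c (c + 8) v.mem s_11436br.mem := by
      apply hs.eqOn
      intro s hsm
      simp only [List.mem_cons, List.mem_nil_iff, or_false] at hsm
      rcases hsm with rfl | rfl | rfl | rfl | rfl | rfl <;> simp only [] <;> omega
    have edim : Codebook.dimensions s_11436br.mem c = Codebook.dimensions v.mem c := by
      simp only [vacc, voff]
      exact hbook.i32 _ (by omega) (by omega) (by omega)
    have hd1 := hin.dim_nonneg
    have hd2 := hin.dim_le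
    rw [hcb0] at hd1 hd2
    refine ReachVia.done ⟨hfr', hh, hcar', hin.noTemps, by rw [ecnt]; exact hin.lt, ?_, ?_, ?_, ?_, ?_⟩
    · rw [w_kept .r14 rfl, hin.r14, ecb, hcb0]
    · rw [w_kept .r15 rfl]
      exact hin.r15
    · have := hpost.bits.result.2 (by omega)
      omega
    · rw [ecb, edim]
      exact hd1
    · rw [ecb, edim]
      exact hd2

/-- **Line 3760, first part** (`cut88` 0x114370: `mov ebx, eax` (y) ; `get_bits(f, 8)` → `cut89` 0x11437f). Only the low byte of `ebx`
is used later (`movzx edx, bl`): its value is not recorded. -/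
theorem ent2 {Lay : Layout} (hLay : Lay.hi = 0x1000000) {μ : Microarch} (hμ : UserX.MicroOK μ) {u₀ : State}
    (hcode : HasCodeNat Lay u₀ Vorbis.L.start_decoder.entry Vorbis.Code.code_start_decoder.nat Vorbis.L.start_decoder.size)
    (h_get_bits : ∀ (others : List Obj) (frames : List (Nat × FrameLayout)) (Blk : Block → Prop) (len : Nat),
      Calls Lay μ Vorbis.WayInv (Vorbis.conv u₀) Vorbis.L.get_bits.entry (Vorbis.Spec.get_bits.spec others frames Blk len))
    (g : Ghost) (i : Nat) (v : State) (A2 A3 : Arena) (A : Arena × List Obj) (b : Nat)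
    (hin : In2 u₀ g i A2 A3 A Vorbis.L.start_decoder.cut88 b v) :
    ReachVia Lay μ WayInv v (fun w => In2 u₀ g i A2 A3 A Vorbis.L.start_decoder.cut89 256 w) := by
  have hfr := hin.frame
  have hcar := hin.carry
  have hh := hin.hand
  have he := hfr.entry
  v_entry he
  simp only [depth] at he_room he_stack
  have hgb := h_get_bits A.2 g.frames' (g.Blk A) g.len
  have hwhere := f_where hfr hh
  have hRA : g.RA = (g.e.reg .rsp).toNat := rfl
  rw [hRA] at hwhere
  have w_rip : v.rip = Vorbis.L.start_decoder.cut88 := hfr.rip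
  have hv_rsp : v.reg .rsp = g.e.reg .rsp - 1480 := by
    rw [hfr.rsp]
    unfold Ghost.R Ghost.RA steady
    have := slot_word (g.e.reg .rsp) 0 (by omega) (by omega)
    simpa using this
  have hv_r15 : v.reg .r15 = UInt64.ofNat g.f := hin.r15
  obtain ⟨c, hcdef⟩ : ∃ c, g.cb v.mem i = c := ⟨_, rfl⟩
  have w_eq : Mem.EqOn Vorbis.L.textLo Vorbis.L.textHi u₀.mem v.mem := hfr.code
  have hdf : v.flags .df = false := (show abiInv _ from hfr.inv).1
  have hmx : v.mxcsr &&& 0x1F80 = 0x1F80 := (show abiInv _ from hfr.inv).2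
  have hsse := Vorbis.sseOK_of_abiInv hfr.inv
  have hfN : (UInt64.ofNat g.f).toNat = g.f := by u_omega
  have hbits0 := hcar.sdw.bits
  have hcbok := hcar.ages.cbOK
  have hci := hcbok.cb_in i hin.lt
  have hcbin := arena_inside hcar.sdw.arena hcbok.F2
  have hcboff := hcar.sdw.arena.blk_off_stack hcbok.F2
  have hAR1 := hcar.sdw.arena.AR1
  have hout := hh.objOut
  have hcb0 : g.cb v.mem i = c := hcdef
  unfold Ghost.cb at hcdef
  rw [hcdef] at hci
  simp only [vblock, voff] at hci hcbin hcboff hout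
  have hcw : c + 2120 ≤ 0xC00000 ∧ (c + 2120 ≤ 0x700000 ∨ 0x800000 ≤ c) ∧ (g.f + 1808 ≤ c ∨ c + 2120 ≤ g.f) := by
    omega
  clear hci hcbin hcboff hAR1 hout
  u_walk hcode [hμ.vendor] until [Vorbis.L.start_decoder.cut89] span [Vorbis.L.textLo, Vorbis.L.textHi] side (v_side)
  · v_inv
  · -- the precondition of get_bits(f, 8) at 0x11437a
    have hun : ShadowUntouched v.mem s_11437a.mem := by v_untouched
    have hrdi : (s_11437a.reg .rdi).toNat = g.f := by
      rw [w_rdi]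
      exact hfN
    refine ⟨⟨shadowPre_call hfr ?_ hun, ?_, ?_⟩, ?_⟩
    · rw [w_rsp]
      unfold Ghost.R Ghost.RA steady
      u_omega
    · rw [hrdi]
      exact readerEnv hh hcar.sdw.env.live
    · rw [hrdi, w_mem]
      exact (Reader.store_off_obj hbits0 _ 8 _ (by u_omega) (by u_omega)).1.bits
    · rw [bitsArg_def, w_rsi]
      decide
  · -- 0x11437f (`cut89`), after get_bits(f, 8) returned
    have hrdi : (s_11437a.reg .rdi).toNat = g.f := by
      rw [w_rdi_11437a]
      exact hfN
    have harg : bitsArg s_11437a = 8 := by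
      rw [bitsArg_def, w_rsi_11437a]
      decide
    have hpost : GetBitsSpecPost (g.Blk A) g.len g.f 8 s_11437a s_11437ar := by
      have := w_post
      simp only [get_bits.spec] at this
      rw [hrdi, harg] at this
      exact this
    v_after_call w_rsp_11437a w_mem_11437a
    simp only [w_rdi_11437a, hfN] at w_same
    have hs : Mem.SameExcept [⟨(g.e.reg .rsp).toNat - 1888, (g.e.reg .rsp).toNat - 1480⟩,
        ⟨g.f + 48, g.f + 56⟩, ⟨g.f + 84, g.f + 96⟩, ⟨g.f + 136, g.f + 144⟩, ⟨g.f + 1484, g.f + 1749⟩,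
        ⟨g.f + 1752, g.f + 1784⟩] v.mem s_11437ar.mem := by
      u_same
    have hrsp : s_11437ar.reg .rsp = addr g.R := by
      rw [w_rsp, ← hv_rsp, hfr.rsp]
    have hinv : abiInv s_11437ar := w_inv
    obtain ⟨hfr', hcar', hobj', _⟩ := step2 (pc' := Vorbis.L.start_decoder.cut89) hfr hh hcar hin.lt hs (by
      intro s hsm
      rw [hcb0]
      simp only [List.mem_cons, List.mem_nil_iff, or_false] at hsm
      unfold OKSpan2 OKSpan Ghost.R Ghost.RA steady depth
      rcases hsm with rfl | rfl | rfl | rfl | rfl | rfl <;> simp only [] <;> omega) w_rip hrsp w_eq hinv hpost.bits.bits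
    have ecnt : stb_vorbis.codebook_count s_11437ar.mem g.f = stb_vorbis.codebook_count v.mem g.f := by
      simp only [vacc, voff]
      exact hobj'.i32 160 (by decide)
    have ecbs : stb_vorbis.codebooks s_11437ar.mem g.f = stb_vorbis.codebooks v.mem g.f := by
      simp only [vacc, voff]
      exact hobj'.u64 168 (by decide)
    have ecb : g.cb s_11437ar.mem i = c := by
      unfold Ghost.cb stb_vorbis.codebooks_at
      rw [ecbs]
      exact hcdef
    -- the fields of `cb(i)` stored so far read the same
    have hbook : Mem.EqOn c (c + 8) v.mem s_11437ar.mem := by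
      apply hs.eqOn
      intro s hsm
      simp only [List.mem_cons, List.mem_nil_iff, or_false] at hsm
      rcases hsm with rfl | rfl | rfl | rfl | rfl | rfl <;> simp only [] <;> omega
    have edim : Codebook.dimensions s_11437ar.mem c = Codebook.dimensions v.mem c := by
      simp only [vacc, voff]
      exact hbook.i32 _ (by omega) (by omega) (by omega)
    have hd1 := hin.dim_nonneg
    have hd2 := hin.dim_le
    rw [hcb0] at hd1 hd2
    refine ReachVia.done ⟨hfr', hh, hcar', hin.noTemps, by rw [ecnt]; exact hin.lt, ?_, ?_, ?_, ?_, ?_⟩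
    · rw [w_kept .r14 rfl, hin.r14, ecb, hcb0]
    · rw [w_kept .r15 rfl]
      exact hin.r15
    · have := hpost.bits.result.2 (by omega)
      omega
    · rw [ecb, edim]
      exact hd1
    · rw [ecb, edim]
      exact hd2

/-- `c->entries = (get_bits(f, 8) << 16) + ((uint8) y << 8) + (uint8) x` is below `2^24` (the walker's form, with `eax < 256`). -/
theorem ent_bound (x y : BitVec 8) (z : BitVec 32) (h : z < 256#32) :
    BitVec.zeroExtend 32 x + (z <<< 16 + BitVec.zeroExtend 32 y <<< 8) < 16777216#32 := by
  bv_decide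

/-- `In2` once `entries` is stored too (from `cut90` on): three zero-extended bytes, `0 ≤ E < 2^24`. -/
structure In3 (u₀ : State) (g : Ghost) (i : Nat) (A2 A3 : Arena) (A : Arena × List Obj) (pc : Word) (bound : Nat) (v : State) :
    Prop extends In2 u₀ g i A2 A3 A pc bound v where
  ent_nonneg : 0 ≤ Codebook.entries v.mem (g.cb v.mem i)
  ent_lt : Codebook.entries v.mem (g.cb v.mem i) < 16777216

/-- **Lines 3760, 3761** (`cut89` 0x11437f: `c->entries = (eax << 16) + ((uint8) y << 8) + (uint8) x` ; check store4 `c + 4` ; the store ;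
`ordered = get_bits(f, 1)` → `cut90` 0x1143aa). -/
theorem ent3 {Lay : Layout} (hLay : Lay.hi = 0x1000000) {μ : Microarch} (hμ : UserX.MicroOK μ) {u₀ : State}
    (hcode : HasCodeNat Lay u₀ Vorbis.L.start_decoder.entry Vorbis.Code.code_start_decoder.nat Vorbis.L.start_decoder.size)
    (hst4 : Asan.SmallCheck Lay μ Vorbis.WayInv (Vorbis.CodeOK u₀) [.rax, .rcx, .rdx] 4 Vorbis.L.__asan_store4_noabort.entry)
    (h_get_bits : ∀ (others : List Obj) (frames : List (Nat × FrameLayout)) (Blk : Block → Prop) (len : Nat),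
      Calls Lay μ Vorbis.WayInv (Vorbis.conv u₀) Vorbis.L.get_bits.entry (Vorbis.Spec.get_bits.spec others frames Blk len))
    (g : Ghost) (i : Nat) (v : State) (A2 A3 : Arena) (A : Arena × List Obj)
    (hin : In2 u₀ g i A2 A3 A Vorbis.L.start_decoder.cut89 256 v) :
    ReachVia Lay μ WayInv v (fun w => In3 u₀ g i A2 A3 A Vorbis.L.start_decoder.cut90 2 w) := by
  have hfr := hin.frame
  have hcar := hin.carry
  have hh := hin.hand
  have he := hfr.entry
  v_entry he
  simp only [depth] at he_room he_stack
  have hgb := h_get_bits A.2 g.frames' (g.Blk A) g.len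
  have hwhere := f_where hfr hh
  have hRA : g.RA = (g.e.reg .rsp).toNat := rfl
  rw [hRA] at hwhere
  have w_rip : v.rip = Vorbis.L.start_decoder.cut89 := hfr.rip
  have hv_rsp : v.reg .rsp = g.e.reg .rsp - 1480 := by
    rw [hfr.rsp]
    unfold Ghost.R Ghost.RA steady
    have := slot_word (g.e.reg .rsp) 0 (by omega) (by omega)
    simpa using this
  have hv_r15 : v.reg .r15 = UInt64.ofNat g.f := hin.r15
  obtain ⟨c, hcdef⟩ : ∃ c, g.cb v.mem i = c := ⟨_, rfl⟩
  have hv_r14 : v.reg .r14 = UInt64.ofNat c := by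
    rw [hin.r14, hcdef]
    rfl
  have w_eq : Mem.EqOn Vorbis.L.textLo Vorbis.L.textHi u₀.mem v.mem := hfr.code
  have hdf : v.flags .df = false := (show abiInv _ from hfr.inv).1
  have hmx : v.mxcsr &&& 0x1F80 = 0x1F80 := (show abiInv _ from hfr.inv).2
  have hsse := Vorbis.sseOK_of_abiInv hfr.inv
  have hfN : (UInt64.ofNat g.f).toNat = g.f := by u_omega
  have hbits0 := hcar.sdw.bits
  -- where the struct is: inside the codebooks block, a live block of the arena, above the text, off the stack, off `*f`
  have hcbok := hcar.ages.cbOK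
  have hci := hcbok.cb_in i hin.lt
  have hcbin := arena_inside hcar.sdw.arena hcbok.F2
  have hcboff := hcar.sdw.arena.blk_off_stack hcbok.F2
  have hAR1 := hcar.sdw.arena.AR1
  have htext := hh.arenaText
  have hout := hh.objOut
  unfold Ghost.cb at hcdef
  rw [hcdef] at hci
  simp only [vblock, voff] at hci hcbin hcboff hout
  have htx : Vorbis.L.textHi = 0x119d40 := rfl
  rw [htx] at htext
  have hcw : 0x119d40 ≤ c ∧ c + 2120 ≤ 0xC00000 ∧ (c + 2120 ≤ 0x700000 ∨ 0x800000 ≤ c) ∧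
      (g.f + 1808 ≤ c ∨ c + 2120 ≤ g.f) := by
    omega
  have hcN : (UInt64.ofNat c).toNat = c := by u_omega
  have hlive : LiveBytes A.2 g.frames' c 2120 := by
    have hbl := hcar.sdw.env.live _ (up g A _ hcbok.F2)
    exact LiveBytes.of_block hbl (by simp only []; omega) (by simp only [voff]; omega)
  u_walk hcode [hμ.vendor] until [Vorbis.L.start_decoder.cut90] span [Vorbis.L.textLo, Vorbis.L.textHi] side (v_side)
  · -- 0x114394 check store4 c+4 (line 3760 `c->entries`): inside the codebooks block
    have hun : ShadowUntouched v.mem s_114394.mem := by v_untouched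
    exact hlive.accSmall hfr.shadow hun _ 4 (by decide) (by u_omega) (by u_omega)
  · v_inv
  · -- the precondition of get_bits(f, 1) at 0x1143a5
    have hun : ShadowUntouched v.mem s_1143a5.mem := by v_untouched
    have hrdi : (s_1143a5.reg .rdi).toNat = g.f := by
      rw [w_rdi]
      exact hfN
    refine ⟨⟨shadowPre_call hfr ?_ hun, ?_, ?_⟩, ?_⟩
    · rw [w_rsp]
      unfold Ghost.R Ghost.RA steady
      u_omega
    · rw [hrdi]
      exact readerEnv hh hcar.sdw.env.live
    · rw [hrdi, w_mem]
      generalize (BitVec.zeroExtend 32 (Word.part Width.w8 (v.reg Reg.rbp)) +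
        (Word.part Width.w32 (v.reg Reg.rax) <<< 16 +
          BitVec.zeroExtend 32 (Word.part Width.w8 (v.reg Reg.rbx)) <<< 8)).toNat = xv
      have b1 := (Reader.store_off_obj hbits0 (g.e.reg .rsp - 1488) 8 1131417 (by u_omega) (by u_omega)).1.bits
      have b2 := (Reader.store_off_obj b1 (UInt64.ofNat c + 4) 4 xv (by u_omega) (by u_omega)).1.bits
      exact (Reader.store_off_obj b2 (g.e.reg .rsp - 1488) 8 1131434 (by u_omega) (by u_omega)).1.bits
    · rw [bitsArg_def, w_rsi]
      decide
  · -- 0x1143aa (`cut90`), after get_bits(f, 1) returned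
    have hrdi : (s_1143a5.reg .rdi).toNat = g.f := by
      rw [w_rdi_1143a5]
      exact hfN
    have harg : bitsArg s_1143a5 = 1 := by
      rw [bitsArg_def, w_rsi_1143a5]
      decide
    have hpost : GetBitsSpecPost (g.Blk A) g.len g.f 1 s_1143a5 s_1143a5r := by
      have := w_post
      simp only [get_bits.spec] at this
      rw [hrdi, harg] at this
      exact this
    -- the stored `entries`, before and after the call
    obtain ⟨E, hEdef⟩ : ∃ E : BitVec 32, BitVec.zeroExtend 32 (Word.part Width.w8 (v.reg Reg.rbp)) +
        (Word.part Width.w32 (v.reg Reg.rax) <<< 16 +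
          BitVec.zeroExtend 32 (Word.part Width.w8 (v.reg Reg.rbx)) <<< 8) = E := ⟨_, rfl⟩
    have hElt : E.toNat < 16777216 := by
      have hy : Word.part Width.w32 (v.reg Reg.rax) < 256#32 := by
        rw [BitVec.lt_def, Vorbis.toNat_part32]
        have := hin.rax
        show (v.reg Reg.rax).toNat % 2 ^ 32 < 256
        omega
      have := ent_bound (Word.part Width.w8 (v.reg Reg.rbp)) (Word.part Width.w8 (v.reg Reg.rbx)) _ hy
      rw [hEdef, BitVec.lt_def] at this
      exact this
    rw [hEdef] at w_mem_1143a5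
    v_after_call w_rsp_1143a5 w_mem_1143a5
    have hE0 : (((v.mem.writeLE (g.e.reg .rsp - 1488) 8 1131417).writeLE (UInt64.ofNat c + 4) 4 E.toNat).writeLE
        (g.e.reg .rsp - 1488) 8 1131434).readLE (UInt64.ofNat c + 4) 4 = E.toNat := by
      u_read
    simp only [w_rdi_1143a5, hfN] at w_same
    have hE1 : s_1143a5r.mem.readLE (UInt64.ofNat c + 4) 4 = E.toNat := by
      u_frame hE0
    have hs : Mem.SameExcept [⟨(g.e.reg .rsp).toNat - 1888, (g.e.reg .rsp).toNat - 1480⟩,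
        ⟨g.f + 48, g.f + 56⟩, ⟨g.f + 84, g.f + 96⟩, ⟨g.f + 136, g.f + 144⟩, ⟨g.f + 1484, g.f + 1749⟩,
        ⟨g.f + 1752, g.f + 1784⟩, ⟨c + 4, c + 8⟩] v.mem s_1143a5r.mem := by
      u_same
    have hrsp : s_1143a5r.reg .rsp = addr g.R := by
      rw [w_rsp, ← hv_rsp, hfr.rsp]
    have hinv : abiInv s_1143a5r := w_inv
    have hcb0 : g.cb v.mem i = c := hcdef
    obtain ⟨hfr', hcar', hobj', _⟩ := step2 (pc' := Vorbis.L.start_decoder.cut90) hfr hh hcar hin.lt hs (by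
      intro s hsm
      rw [hcb0]
      simp only [List.mem_cons, List.mem_nil_iff, or_false] at hsm
      unfold OKSpan2 OKSpan Ghost.R Ghost.RA steady depth
      rcases hsm with rfl | rfl | rfl | rfl | rfl | rfl | rfl <;> simp only [] <;> omega) w_rip hrsp w_eq hinv hpost.bits.bits
    have ecnt : stb_vorbis.codebook_count s_1143a5r.mem g.f = stb_vorbis.codebook_count v.mem g.f := by
      simp only [vacc, voff]
      exact hobj'.i32 160 (by decide)
    have ecbs : stb_vorbis.codebooks s_1143a5r.mem g.f = stb_vorbis.codebooks v.mem g.f := by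
      simp only [vacc, voff]
      exact hobj'.u64 168 (by decide)
    have ecb : g.cb s_1143a5r.mem i = c := by
      unfold Ghost.cb stb_vorbis.codebooks_at
      rw [ecbs]
      exact hcdef
    have hent : Codebook.entries s_1143a5r.mem c = (E.toNat : Int) := by
      simp only [vacc, voff]
      unfold Mem.i32 Mem.u32
      have e4 : addr (c + 4) = UInt64.ofNat c + 4 := by
        unfold addr
        rw [UInt64.ofNat_add]
        rfl
      rw [e4, hE1]
      unfold sint32
      rw [if_pos (by omega)]
    -- `dimensions` reads the same
    have hbook : Mem.EqOn c (c + 4) v.mem s_1143a5r.mem := by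
      apply hs.eqOn
      intro s hsm
      simp only [List.mem_cons, List.mem_nil_iff, or_false] at hsm
      rcases hsm with rfl | rfl | rfl | rfl | rfl | rfl | rfl <;> simp only [] <;> omega
    have edim : Codebook.dimensions s_1143a5r.mem c = Codebook.dimensions v.mem c := by
      simp only [vacc, voff]
      exact hbook.i32 _ (by omega) (by omega) (by omega)
    have hd1 := hin.dim_nonneg
    have hd2 := hin.dim_le
    rw [hcb0] at hd1 hd2
    refine ReachVia.done ⟨⟨hfr', hh, hcar', hin.noTemps, by rw [ecnt]; exact hin.lt, ?_, ?_, ?_, ?_, ?_⟩, ?_, ?_⟩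
    · rw [w_kept .r14 rfl, hin.r14, ecb, hcb0]
    · rw [w_kept .r15 rfl]
      exact hin.r15
    · have := hpost.bits.result.2 (by omega)
      omega
    · rw [ecb, edim]
      exact hd1
    · rw [ecb, edim]
      exact hd2
    · rw [ecb, hent]
      omega
    · rw [ecb, hent]
      omega

/-- **THE FIRST 77 OF THE 129 INSTRUCTIONS OF SEGMENT C2, COMPOSED** (0x114298 … 0x1143aa = `cut90`, with the exit to `AtC16` and the three
ERRSTUBs of lines 3753 – 3755): from the entry assertion `AtC2 i` the machine reaches `AtC16`, `AtERR`, or the inner cut point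
`cut90` (after `ordered = get_bits(f, 1)` returned) with `In3`: `Frame`, the carried clauses `Carry2`, `i < count`, `r14 = cb(i)`,
`r15 = f`, `eax < 2`, `0 ≤ dimensions ≤ 65535`, `0 ≤ entries < 2^24` — the proposed entry assertion of the second sub-segment. -/
theorem to_cut90 {Lay : Layout} (hLay : Lay.hi = 0x1000000) {μ : Microarch} (hμ : UserX.MicroOK μ) {u₀ : State}
    (hcode : HasCodeNat Lay u₀ Vorbis.L.start_decoder.entry Vorbis.Code.code_start_decoder.nat Vorbis.L.start_decoder.size)
    (hld4 : Asan.SmallCheck Lay μ Vorbis.WayInv (Vorbis.CodeOK u₀) [.rax, .rcx, .rdx] 4 Vorbis.L.__asan_load4_noabort.entry)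
    (hld8 : Asan.SmallCheck Lay μ Vorbis.WayInv (Vorbis.CodeOK u₀) [.rax, .rcx, .rdx] 8 Vorbis.L.__asan_load8_noabort.entry)
    (h_get_bits : ∀ (others : List Obj) (frames : List (Nat × FrameLayout)) (Blk : Block → Prop) (len : Nat),
      Calls Lay μ Vorbis.WayInv (Vorbis.conv u₀) Vorbis.L.get_bits.entry (Vorbis.Spec.get_bits.spec others frames Blk len))
    (hst4 : Asan.SmallCheck Lay μ Vorbis.WayInv (Vorbis.CodeOK u₀) [.rax, .rcx, .rdx] 4 Vorbis.L.__asan_store4_noabort.entry)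
    (h_error : ∀ (others : List Obj) (frames : List (Nat × FrameLayout)),
      Calls Lay μ Vorbis.WayInv (Vorbis.conv u₀) Vorbis.L.error.entry (Vorbis.Spec.error.spec others frames))
    (g : Ghost) (i : Nat) (v : State) (hat : AtC2 u₀ g i v) :
    ReachVia Lay μ WayInv v (fun w => AtC16 u₀ g w ∨ AtERR u₀ g w ∨
      ∃ A A2 A3, In3 u₀ g i A2 A3 A Vorbis.L.start_decoder.cut90 2 w) := by
  obtain ⟨A, hb⟩ := hat
  -- 0x114298 … 0x1142ea
  refine (headC2 hLay hμ hcode hld4 hld8 h_get_bits g i v A hb).trans ?_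
  intro v1 h1
  rcases h1 with h16 | ⟨A2, A3, h1⟩
  · exact ReachVia.done (Or.inl h16)
  -- line 3753
  refine (sync1 hLay hμ hcode h_get_bits h_error g i v1 A2 A3 A 256 h1).trans ?_
  intro v2 h2
  rcases h2 with herr | h2
  · exact ReachVia.done (Or.inr (Or.inl herr))
  -- line 3754
  refine (sync2 hLay hμ hcode h_get_bits h_error g i v2 A2 A3 A 256 h2).trans ?_
  intro v3 h3
  rcases h3 with herr | h3
  · exact ReachVia.done (Or.inr (Or.inl herr))
  -- lines 3755, 3756
  refine (sync3 hLay hμ hcode h_get_bits h_error g i v3 A2 A3 A 256 h3).trans ?_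
  intro v4 h4
  rcases h4 with herr | h4
  · exact ReachVia.done (Or.inr (Or.inl herr))
  -- lines 3757, 3758
  refine (dims1 hLay hμ hcode h_get_bits g i v4 A2 A3 A 256 h4).trans ?_
  intro v5 h5
  refine (dims2 hLay hμ hcode hst4 h_get_bits g i v5 A2 A3 A h5).trans ?_
  intro v6 h6
  -- lines 3759 – 3761
  refine (ent1 hLay hμ hcode h_get_bits g i v6 A2 A3 A 256 h6).trans ?_
  intro v7 h7
  refine (ent2 hLay hμ hcode h_get_bits g i v7 A2 A3 A 256 h7).trans ?_
  intro v8 h8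
  refine (ent3 hLay hμ hcode hst4 h_get_bits g i v8 A2 A3 A h8).trans ?_
  intro v9 h9
  exact ReachVia.done (Or.inr (Or.inr ⟨A, A2, A3, h9⟩))

end Vorbis.Spec.start_decoder_C2a
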